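-- pv_equiv track=rewrite | github.com/peter-ruse/Algorithms-and-Data-Structures-in-Python | NTT.py | multiply3
-- ===== SOURCE A (Python) =====
-- def power(n, k, mod):
--     """Computes n ^ k modulo mod, using binary exponentiation"""
--     if k == 0:
--         return 1
--     x = 1
--     while k > 1:
--         if k % 2 == 0:
--             n = n * n % mod
--         else:
--             x = n * x % mod
--             n = n * n % mod
--         k //= 2
--     return n * x % mod
--
-- def get_pow_two(n):
--     """First power of 2 greater than n"""
--     k = 1
--     logk = 0
--     while k <= n:
--         k *= 2
--         logk += 1
--     return k, logk
--
-- def NTT(p, r, n, n_inv, logn, forward, mod):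
--     """The Number Theoretic Transform of the polynomial p modulo mod.
--     The prime should be a Fourier prime, i.e., one of the form m * 2 ^ k + 1.
--     """
--     y = p[:]
--     for i in range(len(y), n):
--         y.append(0)
--     j = n // 2
--     for i in range(1, n - 1):
--         if i >= j:
--             y[i], y[j] = y[j], y[i]
--         k = n // 2
--         while True:
--             if k > j:
--                 break
--             j -= k
--             k //= 2
--         j += k
--     l = 2
--     m = len(r)*forward
--     for _ in range(logn):
--         for j in range(l // 2):
--             for k in range(j, n, l):
--                 a = y[k]
--                 b = r[j * m // l] * y[k + l // 2]
--                 b %= mod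
--                 y[k] = (a + b) % mod
--                 y[k + l // 2] = (a - b) % mod
--         l *= 2
--     if forward == -1:
--         y = [(y[i] * n_inv) % mod for i in range(n)]
--     return y
--
-- def multiply3(p1, p2, r, mod):
--     """Does fast multiplication of p1 * p2 * p2"""
--     n, logn = get_pow_two(len(p1) + 2 * len(p2) - 3)
--     n_inv = power(n, mod - 2, mod)
--     y1 = NTT(p1, r, n, n_inv, logn, 1, mod)
--     y2 = NTT(p2, r, n, n_inv, logn, 1, mod)
--     y3 = [1] * n
--     for i in range(n):
--         y3[i] *= y2[i] * y2[i]
--         y3[i] %= mod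
--         y3[i] *= y1[i]
--         y3[i] %= mod
--     return NTT(y3, r, n, n_inv, logn, -1, mod)
-- ===== SOURCE B (Python) =====
-- # Direct O(n^2 log n) evaluation of the same transform: each output coefficient is a
-- # sum over inputs weighted by an explicitly computed product of twiddle factors,
-- # replacing the butterfly network entirely (no in-place stages, no bit-reversal pass).
--
-- def pw(n, k, mod):
--     if k == 0:
--         return 1
--     if k <= 1:
--         return n % mod
--     if k % 2 == 0:
--         return pw(n * n % mod, k // 2, mod)
--     return n * pw(n * n % mod, k // 2, mod) % mod
--
-- def coef(t, j, r, m, logn, mod):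
--     """Weight of input j in output t of the length-2**logn transform with table r."""
--     c = 1
--     for k in range(logn):
--         if (j // 2 ** (logn - 1 - k)) % 2 == 1:
--             c = c * r[(t % 2 ** k) * m // 2 ** (k + 1)] % mod
--             if (t // 2 ** k) % 2 == 1:
--                 c = -c % mod
--     return c
--
-- def transform(p, r, n, logn, m, mod):
--     out = []
--     for t in range(n):
--         s = 0
--         for j in range(min(len(p), n)):
--             s += p[j] * coef(t, j, r, m, logn, mod)
--         out.append(s % mod)
--     return out
--
-- def multiply3(p1, p2, r, mod):
--     n0 = len(p1) + 2 * len(p2) - 3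
--     logn = n0.bit_length() if n0 > 0 else 0
--     n = 1 << logn
--     ninv = pw(n, mod - 2, mod)
--     y1 = transform(p1, r, n, logn, len(r), mod)
--     y2 = transform(p2, r, n, logn, len(r), mod)
--     y3 = [b * b % mod * a % mod for a, b in zip(y1, y2)]
--     z = transform(y3, r, n, logn, -len(r), mod)
--     return [v * ninv % mod for v in z]
-- ===== Notes on version B (the rewrite author's own statement) =====
-- stated objective: alternative
-- what changed: Replaces the iterative in-place Cooley-Tukey butterfly network (bit-reversal permutation plus log n staged butterfly passes) by a direct matrix-style evaluation: each output coefficient of every transform is computed as a single sum over the inputs, each weighted by an explicitly computed product of twiddle factors read off the bits of the two indices, so no array is ever permuted or updated in place.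
import Mathlib
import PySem

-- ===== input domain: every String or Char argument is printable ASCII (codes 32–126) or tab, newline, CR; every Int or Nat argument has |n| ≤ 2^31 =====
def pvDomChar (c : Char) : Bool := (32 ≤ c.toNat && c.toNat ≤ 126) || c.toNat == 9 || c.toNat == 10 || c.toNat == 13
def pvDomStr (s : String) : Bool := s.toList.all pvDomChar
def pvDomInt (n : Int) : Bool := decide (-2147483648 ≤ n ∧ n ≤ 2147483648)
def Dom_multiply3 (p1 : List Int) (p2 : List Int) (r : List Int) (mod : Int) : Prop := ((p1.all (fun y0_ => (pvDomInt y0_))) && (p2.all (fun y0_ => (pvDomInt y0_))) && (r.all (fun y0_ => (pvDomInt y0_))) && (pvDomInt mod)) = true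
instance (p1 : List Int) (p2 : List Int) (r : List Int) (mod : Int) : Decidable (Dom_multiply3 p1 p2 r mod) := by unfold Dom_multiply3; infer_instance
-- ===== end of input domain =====

-- B replaces the butterfly network by a direct evaluation of the same transform: each
-- output coefficient is one sum over the inputs, weighted by an explicitly computed
-- product of twiddle factors — objective: alternative, no speed claim.

-- ===== PORT A =====

-- while k > 1 of power()
def powerLoopA (md n x k : Int) : Int :=
  if 1 < k then
    if PySem.Int.mod k 2 = 0 then
      powerLoopA md (PySem.Int.mod (n * n) md) x (PySem.Int.floordiv k 2)
    else
      powerLoopA md (PySem.Int.mod (n * n) md) (PySem.Int.mod (n * x) md) (PySem.Int.floordiv k 2)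
  else
    PySem.Int.mod (n * x) md
termination_by k.toNat
decreasing_by
  all_goals
    have h2 : PySem.Int.floordiv k 2 < k := by
      rw [PySem.Int.floordiv_lt_iff_lt_mul (by omega)]; omega
    omega

def powerA (n k md : Int) : Int :=
  if k = 0 then 1 else powerLoopA md n 1 k

-- while k <= n of get_pow_two; the k ≤ 0 branch is a totality guard only (from k = 1 the
-- loop keeps k ≥ 1; Python would diverge from k ≤ 0, which is unreachable)
def gptLoopA (n k logk : Int) : Int × Int :=
  if k ≤ n then (if k ≤ 0 then (k, logk) else gptLoopA n (k * 2) (logk + 1)) else (k, logk)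
termination_by (n + 1 - k).toNat
decreasing_by omega

def get_pow_twoA (n : Int) : Int × Int := gptLoopA n 1 0

-- the inner `while True` that advances the reversed counter j (k ≤ 0 branch: totality
-- guard only; Python would diverge there, unreachable from k = n//2 on visited states)
def jUpdateA (j k : Int) : Int :=
  if j < k then j + k
  else if k ≤ 0 then j
  else jUpdateA (j - k) (PySem.Int.floordiv k 2)
termination_by k.toNat
decreasing_by
  have h2 : PySem.Int.floordiv k 2 < k := by
    rw [PySem.Int.floordiv_lt_iff_lt_mul (by omega)]; omega
  omega

-- the conditional-swap loop `for i in range(1, n-1)` (state: the list and j)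
def swapLoopA (n : Int) (st : List Int × Int) : List Int × Int :=
  (PySem.List.pyRange 1 (n - 1) 1).foldl
    (fun st i =>
      let y := st.1
      let j := st.2
      let y := if j ≤ i then
          (y.set i.toNat (y.getD j.toNat 0)).set j.toNat (y.getD i.toNat 0)
        else y
      (y, jUpdateA j (PySem.Int.floordiv n 2))) st

-- one butterfly (indices provably in range under Pre_, so .set/.getD are Python-exact here)
def butterflyA (r : List Int) (md m l : Int) (j : Int) (y : List Int) (k : Int) : List Int :=
  let a := y.getD k.toNat 0
  let b := PySem.Int.mod
     (PySem.List.pyGetD r (PySem.Int.floordiv (j * m) l) 0 * y.getD (k + PySem.Int.floordiv l 2).toNat 0) md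
  (y.set k.toNat (PySem.Int.mod (a + b) md)).set
    (k + PySem.Int.floordiv l 2).toNat (PySem.Int.mod (a - b) md)

-- `for _ in range(logn)` with its two inner loops; recursion on the iteration count
def stagesA (r : List Int) (md m n : Int) : Nat → Int → List Int → List Int
  | 0, _, y => y
  | c + 1, l, y =>
    stagesA r md m n c (l * 2)
      ((PySem.List.pyRange 0 (PySem.Int.floordiv l 2) 1).foldl
        (fun y j => (PySem.List.pyRange j n l).foldl (butterflyA r md m l j) y) y)

def NTTA (p r : List Int) (n n_inv logn forward md : Int) : List Int :=
  let y := (PySem.List.pyRange (p.length : Int) n 1).foldl (fun y _ => y ++ [(0:Int)]) p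
  let st := swapLoopA n (y, PySem.Int.floordiv n 2)
  let m := (r.length : Int) * forward
  let y := stagesA r md m n logn.toNat 2 st.1
  if forward = -1 then
    (PySem.List.pyRange 0 n 1).map (fun i => PySem.Int.mod (y.getD i.toNat 0 * n_inv) md)
  else y

def multiply3 (p1 : List Int) (p2 : List Int) (r : List Int) (mod : Int) : List Int :=
  let nl := get_pow_twoA ((p1.length : Int) + 2 * (p2.length : Int) - 3)
  let n := nl.1
  let logn := nl.2
  let n_inv := powerA n (mod - 2) mod
  let y1 := NTTA p1 r n n_inv logn 1 mod
  let y2 := NTTA p2 r n n_inv logn 1 mod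
  let y3 := (PySem.List.pyRange 0 n 1).map (fun i =>
    PySem.Int.mod (PySem.Int.mod (1 * (y2.getD i.toNat 0 * y2.getD i.toNat 0)) mod * y1.getD i.toNat 0) mod)
  NTTA y3 r n n_inv logn (-1) mod

-- ===== PORT B =====

def pwB (n k md : Int) : Int :=
  if k = 0 then 1
  else if k ≤ 1 then PySem.Int.mod n md
  else if PySem.Int.mod k 2 = 0 then pwB (PySem.Int.mod (n * n) md) (PySem.Int.floordiv k 2) md
  else PySem.Int.mod (n * pwB (PySem.Int.mod (n * n) md) (PySem.Int.floordiv k 2) md) md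
termination_by k.toNat
decreasing_by
  all_goals
    have h2 : PySem.Int.floordiv k 2 < k := by
      rw [PySem.Int.floordiv_lt_iff_lt_mul (by omega)]; omega
    omega

-- coef(): `for k in range(logn)` accumulating the twiddle-factor product
def coefB (t j : Int) (r : List Int) (m logn md : Int) : Int :=
  (PySem.List.pyRange 0 logn 1).foldl (fun c k =>
    if PySem.Int.mod (PySem.Int.floordiv j ((2:Int) ^ (logn - 1 - k).toNat)) 2 = 1 then
      let c' := PySem.Int.mod (c * PySem.List.pyGetD r
        (PySem.Int.floordiv (PySem.Int.mod t ((2:Int) ^ k.toNat) * m) ((2:Int) ^ (k.toNat + 1))) 0) md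
      if PySem.Int.mod (PySem.Int.floordiv t ((2:Int) ^ k.toNat)) 2 = 1 then PySem.Int.mod (-c') md else c'
    else c) 1

-- transform(): one weighted sum per output coefficient
def transformB (p r : List Int) (n logn m md : Int) : List Int :=
  (PySem.List.pyRange 0 n 1).map (fun t =>
    PySem.Int.mod ((PySem.List.pyRange 0 (min ((p.length : Int)) n) 1).foldl
      (fun s j => s + p.getD j.toNat 0 * coefB t j r m logn md) 0) md)

def multiply3_alt (p1 : List Int) (p2 : List Int) (r : List Int) (mod : Int) : List Int :=
  let n0 := (p1.length : Int) + 2 * (p2.length : Int) - 3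
  let logn : Int := if 0 < n0 then (PySem.Int.bitLength n0 : Int) else 0
  let n : Int := (1 : Int) <<< logn.toNat
  let ninv := pwB n (mod - 2) mod
  let y1 := transformB p1 r n logn (r.length : Int) mod
  let y2 := transformB p2 r n logn (r.length : Int) mod
  let y3 := (y1.zip y2).map (fun ab => PySem.Int.mod (PySem.Int.mod (ab.2 * ab.2) mod * ab.1) mod)
  let z := transformB y3 r n logn (-(r.length : Int)) mod
  z.map (fun v => PySem.Int.mod (v * ninv) mod)

-- ===== PRECONDITION & SPEC =====

-- Pre_ excludes exactly the inputs on which A raises: mod = 0 (ZeroDivisionError in `%`),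
-- and r = [] while the transform size n exceeds 1 (IndexError on r[...]).
def Pre_multiply3 (p1 : List Int) (p2 : List Int) (r : List Int) (mod : Int) : Prop :=
  mod ≠ 0 ∧ ((p1.length : Int) + 2 * (p2.length : Int) ≤ 3 ∨ r ≠ [])
instance (p1 : List Int) (p2 : List Int) (r : List Int) (mod : Int) : Decidable (Pre_multiply3 p1 p2 r mod) := by
  unfold Pre_multiply3; infer_instance

def pvWitness_multiply3 : List Int × List Int × List Int × Int := ([1, 2], [1, 2], [3, 5, 7, 9], 17)

def Spec_multiply3 (p1 : List Int) (p2 : List Int) (r : List Int) (mod : Int) (out : List Int) : Prop := out = multiply3_alt p1 p2 r mod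
instance (p1 : List Int) (p2 : List Int) (r : List Int) (mod : Int) (out : List Int) : Decidable (Spec_multiply3 p1 p2 r mod out) := by unfold Spec_multiply3; infer_instance

-- ===== CLAIM (what is proved, stated in full; the proofs are below) =====
def Claim_equal_multiply3 : Prop := ∀ (p1 : List Int) (p2 : List Int) (r : List Int) (mod : Int), Dom_multiply3 p1 p2 r mod → Pre_multiply3 p1 p2 r mod → Spec_multiply3 p1 p2 r mod (multiply3 p1 p2 r mod)

-- ===== LEMMAS AND PROOFS =====

-- ---- small getD/set plumbing ----

theorem pvGetD_set_self (l : List Int) (i : Nat) (a d : Int) (h : i < l.length) :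
    (l.set i a).getD i d = a := by
  simp [List.getD_eq_getElem?_getD, h]

theorem pvGetD_set_ne (l : List Int) (i j : Nat) (a d : Int) (h : i ≠ j) :
    (l.set i a).getD j d = l.getD j d := by
  simp [List.getD_eq_getElem?_getD, h]

-- ---- Python-mod congruences (md ≠ 0) ----

theorem pymod_congr {md a b : Int} (hmd : md ≠ 0) (h : md ∣ a - b) :
    PySem.Int.mod a md = PySem.Int.mod b md := by
  have ea := PySem.Int.floordiv_mul_add_mod a md
  have eb := PySem.Int.floordiv_mul_add_mod b md
  have hdvd : md ∣ PySem.Int.mod a md - PySem.Int.mod b md := by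
    obtain ⟨t, ht⟩ := h
    exact ⟨t - PySem.Int.floordiv a md + PySem.Int.floordiv b md, by linarith [ea, eb]⟩
  have hz : PySem.Int.mod a md - PySem.Int.mod b md = 0 := by
    apply Int.eq_zero_of_abs_lt_dvd ((abs_dvd _ _).mpr hdvd)
    rcases lt_or_gt_of_ne hmd with hneg | hpos
    · have b1 := PySem.Int.mod_neg_bounds a hneg
      have b2 := PySem.Int.mod_neg_bounds b hneg
      rw [abs_lt]; rcases abs_cases md with ⟨h1, h2⟩ | ⟨h1, h2⟩ <;> omega
    · have b1 := PySem.Int.mod_nonneg a hpos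
      have b2 := PySem.Int.mod_lt a hpos
      have b3 := PySem.Int.mod_nonneg b hpos
      have b4 := PySem.Int.mod_lt b hpos
      rw [abs_lt]; cases abs_cases md <;> omega
  omega

theorem pymod_dvd_of_eq {md a b : Int} (h : PySem.Int.mod a md = PySem.Int.mod b md) :
    md ∣ a - b := by
  have ea := PySem.Int.floordiv_mul_add_mod a md
  have eb := PySem.Int.floordiv_mul_add_mod b md
  exact ⟨PySem.Int.floordiv a md - PySem.Int.floordiv b md, by linarith⟩

theorem pymod_mul_left {md : Int} (hmd : md ≠ 0) (a b : Int) :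
    PySem.Int.mod (PySem.Int.mod a md * b) md = PySem.Int.mod (a * b) md := by
  apply pymod_congr hmd
  have hm : PySem.Int.mod a md = a - PySem.Int.floordiv a md * md := by
    have := PySem.Int.floordiv_mul_add_mod a md; omega
  exact ⟨-(PySem.Int.floordiv a md) * b, by rw [hm]; ring⟩

theorem pymod_mul_right {md : Int} (hmd : md ≠ 0) (a b : Int) :
    PySem.Int.mod (a * PySem.Int.mod b md) md = PySem.Int.mod (a * b) md := by
  apply pymod_congr hmd
  have hm : PySem.Int.mod b md = b - PySem.Int.floordiv b md * md := by
    have := PySem.Int.floordiv_mul_add_mod b md; omega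
  exact ⟨-a * PySem.Int.floordiv b md, by rw [hm]; ring⟩

theorem pymod_idem {md : Int} (hmd : md ≠ 0) (a : Int) :
    PySem.Int.mod (PySem.Int.mod a md) md = PySem.Int.mod a md := by
  have := pymod_mul_left hmd a 1
  simpa using this

-- ---- a tiny 'congruent mod md' toolkit ----

def mdeq (md a b : Int) : Prop := PySem.Int.mod a md = PySem.Int.mod b md

theorem mdeq_refl (md a : Int) : mdeq md a a := rfl

theorem mdeq_symm {md a b : Int} (h : mdeq md a b) : mdeq md b a := h.symm

theorem mdeq_trans {md a b c : Int} (h1 : mdeq md a b) (h2 : mdeq md b c) : mdeq md a c :=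
  h1.trans h2

theorem mdeq_of_dvd {md a b : Int} (hmd : md ≠ 0) (h : md ∣ a - b) : mdeq md a b :=
  pymod_congr hmd h

theorem mdeq_dvd {md a b : Int} (h : mdeq md a b) : md ∣ a - b := pymod_dvd_of_eq h

theorem mdeq_add {md a b c d : Int} (hmd : md ≠ 0) (h1 : mdeq md a b) (h2 : mdeq md c d) :
    mdeq md (a + c) (b + d) := by
  apply mdeq_of_dvd hmd
  have := mdeq_dvd h1; have := mdeq_dvd h2
  have : md ∣ (a - b) + (c - d) := dvd_add ‹md ∣ a - b› ‹md ∣ c - d›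
  convert this using 1; ring

theorem mdeq_neg {md a b : Int} (hmd : md ≠ 0) (h : mdeq md a b) : mdeq md (-a) (-b) := by
  apply mdeq_of_dvd hmd
  have := mdeq_dvd h
  have : md ∣ -(a - b) := dvd_neg.mpr ‹md ∣ a - b›
  convert this using 1; ring

theorem mdeq_sub {md a b c d : Int} (hmd : md ≠ 0) (h1 : mdeq md a b) (h2 : mdeq md c d) :
    mdeq md (a - c) (b - d) := by
  have := mdeq_add hmd h1 (mdeq_neg hmd h2)
  simpa [sub_eq_add_neg] using this

theorem mdeq_mul {md a b c d : Int} (hmd : md ≠ 0) (h1 : mdeq md a b) (h2 : mdeq md c d) :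
    mdeq md (a * c) (b * d) := by
  apply mdeq_of_dvd hmd
  have d1 := mdeq_dvd h1; have d2 := mdeq_dvd h2
  have : md ∣ (a - b) * c + b * (c - d) := dvd_add (d1.mul_right c) (d2.mul_left b)
  convert this using 1; ring

theorem mdeq_mod_left {md a : Int} (hmd : md ≠ 0) : mdeq md (PySem.Int.mod a md) a :=
  pymod_idem hmd a

theorem mdeq_sum {md : Int} (hmd : md ≠ 0) {ι : Type} (s : Finset ι) (f g : ι → Int)
    (h : ∀ i ∈ s, mdeq md (f i) (g i)) : mdeq md (∑ i ∈ s, f i) (∑ i ∈ s, g i) := by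
  apply mdeq_of_dvd hmd
  rw [← Finset.sum_sub_distrib]
  exact Finset.dvd_sum (fun i hi => mdeq_dvd (h i hi))

-- ---- power ≡ pwB ----

theorem pvFloordiv2_bounds (k : Int) (h : 1 < k) :
    1 ≤ PySem.Int.floordiv k 2 ∧ PySem.Int.floordiv k 2 < k := by
  constructor
  · rw [PySem.Int.le_floordiv_iff_mul_le (by omega : (0:Int) < 2)]; omega
  · rw [PySem.Int.floordiv_lt_iff_lt_mul (by omega)]; omega

theorem pwB_idem {md : Int} (hmd : md ≠ 0) : ∀ (kn : Nat) (k : Int), k.toNat = kn → 1 ≤ k → ∀ n,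
    PySem.Int.mod (pwB n k md) md = pwB n k md := by
  intro kn
  induction kn using Nat.strong_induction_on with
  | _ kn ih =>
    intro k hkn hk n
    rw [pwB]
    by_cases h0 : k = 0
    · omega
    · simp only [h0, if_false]
      by_cases h1 : k ≤ 1
      · simp only [h1, if_true]; exact pymod_idem hmd n
      · have hb := pvFloordiv2_bounds k (by omega)
        by_cases h2 : PySem.Int.mod k 2 = 0
        · simp only [h1, h2, if_true, if_false]
          exact ih (PySem.Int.floordiv k 2).toNat (by omega) _ rfl (by omega) _
        · simp only [h1, h2, if_false]
          exact pymod_idem hmd _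

theorem powerLoop_eq {md : Int} (hmd : md ≠ 0) : ∀ (kn : Nat) (k : Int), k.toNat = kn → 1 ≤ k → ∀ n x,
    powerLoopA md n x k = PySem.Int.mod (pwB n k md * x) md := by
  intro kn
  induction kn using Nat.strong_induction_on with
  | _ kn ih =>
    intro k hkn hk n x
    rw [powerLoopA]
    by_cases h1 : 1 < k
    · have hb := pvFloordiv2_bounds k h1
      have hrec : ∀ x', powerLoopA md (PySem.Int.mod (n * n) md) x' (PySem.Int.floordiv k 2)
          = PySem.Int.mod (pwB (PySem.Int.mod (n * n) md) (PySem.Int.floordiv k 2) md * x') md := by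
        intro x'
        exact ih (PySem.Int.floordiv k 2).toNat (by omega) _ rfl (by omega) _ _
      have hpw : pwB n k md = if PySem.Int.mod k 2 = 0
          then pwB (PySem.Int.mod (n * n) md) (PySem.Int.floordiv k 2) md
          else PySem.Int.mod (n * pwB (PySem.Int.mod (n * n) md) (PySem.Int.floordiv k 2) md) md := by
        rw [pwB]; simp only [show ¬(k = 0) by omega, show ¬(k ≤ 1) by omega, if_false]
      by_cases h2 : PySem.Int.mod k 2 = 0
      · simp only [h1, if_true, h2, hrec, hpw]
      · simp only [h1, if_true, h2, if_false, hrec, hpw]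
        rw [pymod_mul_right hmd, pymod_mul_left hmd]
        congr 1; ring
    · simp only [h1, if_false]
      have hk1 : k = 1 := by omega
      subst hk1
      rw [pwB]; norm_num
      rw [pymod_mul_left hmd]

theorem power_eq {md : Int} (hmd : md ≠ 0) (n k : Int) : powerA n k md = pwB n k md := by
  unfold powerA
  by_cases h0 : k = 0
  · rw [pwB]; simp [h0]
  · simp only [h0, if_false]
    by_cases h1 : 1 ≤ k
    · rw [powerLoop_eq hmd k.toNat k rfl h1, mul_one, pwB_idem hmd k.toNat k rfl h1]
    · rw [powerLoopA, pwB]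
      simp only [show ¬(1 < k) by omega, if_false, h0, if_false, show k ≤ 1 by omega, if_true]
      rw [mul_one]

-- ---- get_pow_two ≡ bit_length closed form ----

def pvL0 (x : Int) : Nat := if 0 < x then PySem.Int.bitLength x else 0

theorem pvL0_big (x : Int) : x < (2:Int) ^ pvL0 x := by
  unfold pvL0
  by_cases h : 0 < x
  · simp only [h, if_true]
    have h1 : ((x.natAbs : Nat) : Int) < (((2:Nat) ^ PySem.Int.bitLength x : Nat) : Int) := by
      exact_mod_cast PySem.Int.lt_two_pow_bitLength x
    have h2 : (((2:Nat) ^ PySem.Int.bitLength x : Nat) : Int) = (2:Int) ^ PySem.Int.bitLength x := by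
      push_cast; ring
    omega
  · simp only [h, if_false]; omega

theorem pvL0_small (x : Int) : ∀ t : Nat, t < pvL0 x → (2:Int) ^ t ≤ x := by
  intro t ht
  unfold pvL0 at ht
  by_cases h : 0 < x
  · simp only [h, if_true] at ht
    have h1 := PySem.Int.two_pow_bitLength_le x (by omega)
    have h2 : ((2:Nat) ^ t : Nat) ≤ 2 ^ (PySem.Int.bitLength x - 1) := Nat.pow_le_pow_right (by omega) (by omega)
    have h3 : (((2:Nat) ^ t : Nat) : Int) ≤ ((x.natAbs : Nat) : Int) := by exact_mod_cast le_trans h2 h1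
    have h4 : (((2:Nat) ^ t : Nat) : Int) = (2:Int) ^ t := by push_cast; ring
    omega
  · simp [h] at ht

theorem gptLoop_eq (x : Int) (L : Nat) (hbig : x < 2 ^ L) (hsmall : ∀ t : Nat, t < L → (2:Int) ^ t ≤ x) :
    ∀ (d t : Nat), t + d = L → gptLoopA x ((2:Int) ^ t) (t : Int) = ((2:Int) ^ L, (L : Int)) := by
  intro d
  induction d with
  | zero =>
    intro t htd
    rw [gptLoopA]
    have : ¬ ((2:Int) ^ t ≤ x) := by rw [show t = L by omega]; omega
    simp only [this, if_false]
    rw [show t = L by omega]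
  | succ d ih =>
    intro t htd
    rw [gptLoopA]
    have h1 : (2:Int) ^ t ≤ x := hsmall t (by omega)
    have h2 : ¬ ((2:Int) ^ t ≤ 0) := by
      have := pow_pos (by norm_num : (0:Int) < 2) t; omega
    simp only [h1, if_true, h2, if_false]
    have h3 : (2:Int) ^ t * 2 = 2 ^ (t + 1) := (pow_succ 2 t).symm
    have h4 : ((t:Int) + 1) = ((t + 1 : Nat) : Int) := by push_cast; ring
    rw [h3, h4]
    exact ih (t + 1) (by omega)

theorem gpt_eq (x : Int) : get_pow_twoA x = ((2:Int) ^ pvL0 x, (pvL0 x : Int)) := by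
  have := gptLoop_eq x (pvL0 x) (pvL0_big x) (pvL0_small x) (pvL0 x) 0 (by omega)
  unfold get_pow_twoA
  simpa using this

theorem one_shiftLeft_int (L : Nat) : (1:Int) <<< L = 2 ^ L := by
  rw [Int.shiftLeft_eq]; ring

-- ---- bit reversal ----

def revN : Nat → Nat → Nat
  | 0, _ => 0
  | t + 1, i => revN t (i / 2) + (i % 2) * 2 ^ t

theorem revN_lt : ∀ (t i : Nat), revN t i < 2 ^ t := by
  intro t
  induction t with
  | zero => intro i; simp [revN]
  | succ t ih =>
    intro i
    have h1 := ih (i / 2)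
    have h2 : 2 ^ (t + 1) = 2 * 2 ^ t := by ring
    rcases Nat.mod_two_eq_zero_or_one i with h | h <;>
      simp only [revN, h] <;> omega

theorem revN_zero : ∀ t : Nat, revN t 0 = 0 := by
  intro t; induction t with
  | zero => rfl
  | succ t ih => simp [revN, ih]

theorem revN_msb : ∀ (t a b : Nat), a < 2 ^ t → b ≤ 1 → revN (t + 1) (a + b * 2 ^ t) = b + 2 * revN t a := by
  intro t
  induction t with
  | zero =>
    intro a b ha hb
    interval_cases a
    interval_cases b <;> simp [revN]
  | succ t ih =>
    intro a b ha hb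
    have hp1 : (2:Nat) ^ (t + 1) = 2 * 2 ^ t := by ring
    have hc : b * 2 ^ (t + 1) = 2 * (b * 2 ^ t) := by rw [hp1]; ring
    have hdiv : (a + b * 2 ^ (t + 1)) / 2 = a / 2 + b * 2 ^ t := by omega
    have hmod : (a + b * 2 ^ (t + 1)) % 2 = a % 2 := by omega
    have ha2 : a / 2 < 2 ^ t := by omega
    show revN (t + 1) ((a + b * 2 ^ (t + 1)) / 2) + ((a + b * 2 ^ (t + 1)) % 2) * 2 ^ (t + 1)
        = b + 2 * revN (t + 1) a
    rw [hdiv, hmod, ih (a / 2) b ha2 hb]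
    show b + 2 * revN t (a / 2) + a % 2 * 2 ^ (t + 1) = b + 2 * (revN t (a / 2) + a % 2 * 2 ^ t)
    have he : a % 2 * 2 ^ (t + 1) = 2 * (a % 2 * 2 ^ t) := by rw [hp1]; ring
    omega

theorem revN_revN : ∀ (t i : Nat), i < 2 ^ t → revN t (revN t i) = i := by
  intro t
  induction t with
  | zero => intro i hi; interval_cases i; rfl
  | succ t ih =>
    intro i hi
    have h1 : revN (t + 1) i = revN t (i / 2) + (i % 2) * 2 ^ t := rfl
    rw [h1, revN_msb t (revN t (i / 2)) (i % 2) (revN_lt t _) (by omega),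
        ih (i / 2) (by
          have hp : (2:Nat) ^ (t + 1) = 2 * 2 ^ t := by ring
          omega)]
    omega

theorem revN_inj (t : Nat) {i j : Nat} (hi : i < 2 ^ t) (hj : j < 2 ^ t) (h : revN t i = revN t j) : i = j := by
  rw [← revN_revN t i hi, h, revN_revN t j hj]

theorem revN_last : ∀ t : Nat, revN t (2 ^ t - 1) = 2 ^ t - 1 := by
  intro t; induction t with
  | zero => rfl
  | succ t ih =>
    have hp : 2 ^ (t + 1) = 2 * 2 ^ t := by ring
    have h1 : 2 ^ t ≥ 1 := Nat.one_le_two_pow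
    have hdiv : (2 ^ (t + 1) - 1) / 2 = 2 ^ t - 1 := by omega
    have hmod : (2 ^ (t + 1) - 1) % 2 = 1 := by omega
    show revN t ((2 ^ (t + 1) - 1) / 2) + ((2 ^ (t + 1) - 1) % 2) * 2 ^ t = 2 ^ (t + 1) - 1
    rw [hdiv, hmod, ih]; omega

theorem revN_one (L : Nat) (h : 1 ≤ L) : revN L 1 = 2 ^ (L - 1) := by
  obtain ⟨t, rfl⟩ : ∃ t, L = t + 1 := ⟨L - 1, by omega⟩
  show revN t 0 + 1 * 2 ^ t = 2 ^ t
  rw [revN_zero]; omega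

-- bit k of revN t i is bit (t-1-k) of i
theorem revN_bit : ∀ (t i k : Nat), k < t → revN t i / 2 ^ k % 2 = i / 2 ^ (t - 1 - k) % 2 := by
  intro t
  induction t with
  | zero => omega
  | succ t ih =>
    intro i k hk
    have hrl := revN_lt t (i / 2)
    have hgoal : t + 1 - 1 - k = t - k := by omega
    show (revN t (i / 2) + (i % 2) * 2 ^ t) / 2 ^ k % 2 = i / 2 ^ (t + 1 - 1 - k) % 2
    rw [hgoal]
    by_cases hkt : k = t
    · subst hkt
      have hdiv : (revN k (i / 2) + (i % 2) * 2 ^ k) / 2 ^ k = i % 2 := by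
        rw [Nat.add_mul_div_right _ _ (Nat.two_pow_pos k),
            Nat.div_eq_of_lt (revN_lt k _)]
        omega
      rw [hdiv, Nat.sub_self, pow_zero, Nat.div_one]
      omega
    · have hklt : k < t := by omega
      have hsplit : (i % 2) * 2 ^ t = ((i % 2) * 2 ^ (t - k)) * 2 ^ k := by
        rw [mul_assoc, ← pow_add]
        congr 2
        omega
      rw [hsplit, Nat.add_mul_div_right _ _ (Nat.two_pow_pos k)]
      have hev : (2:Nat) ^ (t - k) = 2 * 2 ^ (t - k - 1) := by
        rw [← pow_succ']
        congr 1
        omega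
      obtain ⟨c, hc⟩ : ∃ c, i % 2 * 2 ^ (t - k) = 2 * c :=
        ⟨i % 2 * 2 ^ (t - k - 1), by rw [hev]; ring⟩
      have hmod2 : (revN t (i / 2) / 2 ^ k + i % 2 * 2 ^ (t - k)) % 2 = revN t (i / 2) / 2 ^ k % 2 := by
        omega
      rw [hmod2, ih (i / 2) k hklt, Nat.div_div_eq_div_mul]
      congr 2
      rw [← pow_succ']
      congr 1
      omega

-- ---- the reversed-counter increment ----

theorem floordiv_pow2 (e : Nat) : PySem.Int.floordiv ((2:Int) ^ (e + 1)) 2 = 2 ^ e := by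
  rw [PySem.Int.floordiv_eq_ediv_of_pos (by norm_num), pow_succ, Int.mul_ediv_cancel _ (by norm_num)]

theorem jUpdateA_rev : ∀ t : Nat, 1 ≤ t → ∀ i : Nat, i + 1 < 2 ^ t →
    jUpdateA ((revN t i : Nat) : Int) ((2:Int) ^ (t - 1)) = ((revN t (i + 1) : Nat) : Int) := by
  intro t
  induction t with
  | zero => omega
  | succ t ih =>
    intro _ i hi
    have hp : (2:Nat) ^ (t + 1) = 2 * 2 ^ t := by ring
    have hrl := revN_lt t (i / 2)
    have hdef : revN (t + 1) i = revN t (i / 2) + (i % 2) * 2 ^ t := rfl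
    have hdef1 : revN (t + 1) (i + 1) = revN t ((i + 1) / 2) + ((i + 1) % 2) * 2 ^ t := rfl
    simp only [Nat.add_sub_cancel]
    rcases Nat.mod_two_eq_zero_or_one i with hpar | hpar
    · -- even: immediate break, add the top bit
      have h0 : revN (t + 1) i = revN t (i / 2) := by
        rw [hdef, hpar, Nat.zero_mul, Nat.add_zero]
      have hcond : ((revN (t + 1) i : Nat) : Int) < (2:Int) ^ t := by
        rw [h0]; exact_mod_cast hrl
      rw [jUpdateA]
      simp only [hcond, if_true]
      have h1 : revN (t + 1) (i + 1) = revN t (i / 2) + 2 ^ t := by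
        rw [hdef1, show (i + 1) % 2 = 1 by omega, show (i + 1) / 2 = i / 2 by omega, Nat.one_mul]
      rw [h1, h0]
      push_cast; ring
    · -- odd: clear the top bit, halve, recurse
      have h0 : revN (t + 1) i = revN t (i / 2) + 2 ^ t := by
        rw [hdef, hpar, Nat.one_mul]
      have hcond : ¬ (((revN (t + 1) i : Nat) : Int) < (2:Int) ^ t) := by
        rw [h0]; push_cast; omega
      have hpos : ¬ ((2:Int) ^ t ≤ 0) := by
        have := pow_pos (by norm_num : (0:Int) < 2) t; omega
      rw [jUpdateA]
      simp only [hcond, if_false, hpos]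
      rcases Nat.eq_zero_or_pos t with ht0 | ht1
      · subst ht0; norm_num at hi; omega
      obtain ⟨u, rfl⟩ : ∃ u, t = u + 1 := ⟨t - 1, by omega⟩
      have hsub : ((revN (u + 1 + 1) i : Nat) : Int) - (2:Int) ^ (u + 1) = ((revN (u + 1) (i / 2) : Nat) : Int) := by
        rw [h0]; push_cast; ring
      rw [hsub, floordiv_pow2 u]
      have hrec := ih (by omega) (i / 2) (by omega)
      simp only [Nat.add_sub_cancel] at hrec
      rw [hrec]
      congr 1
      rw [hdef1, show (i + 1) % 2 = 0 by omega, show (i + 1) / 2 = i / 2 + 1 by omega]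
      omega

-- ---- the conditional-swap loop is the bit-reversal gather ----

theorem gather_loop (L : Nat) (hL : 1 ≤ L) (y0 : List Int) (hlen : 2 ^ L ≤ y0.length) :
    ∀ (d a : Nat), a + d = 2 ^ L - 1 → 1 ≤ a → ∀ y : List Int,
      y.length = y0.length →
      (∀ t : Nat, y.getD t 0 = if t < 2 ^ L ∧ t < a ∧ revN L t < a then y0.getD (revN L t) 0 else y0.getD t 0) →
      (((PySem.List.pyRange (a : Int) ((2:Int) ^ L - 1) 1).foldl
          (fun st i =>
            let y := st.1
            let j := st.2
            let y := if j ≤ i then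
                (y.set i.toNat (y.getD j.toNat 0)).set j.toNat (y.getD i.toNat 0)
              else y
            (y, jUpdateA j (PySem.Int.floordiv ((2:Int) ^ L) 2)))
          (y, ((revN L a : Nat) : Int))).1.length = y0.length ∧
        ∀ t : Nat, ((PySem.List.pyRange (a : Int) ((2:Int) ^ L - 1) 1).foldl
          (fun st i =>
            let y := st.1
            let j := st.2
            let y := if j ≤ i then
                (y.set i.toNat (y.getD j.toNat 0)).set j.toNat (y.getD i.toNat 0)
              else y
            (y, jUpdateA j (PySem.Int.floordiv ((2:Int) ^ L) 2)))
          (y, ((revN L a : Nat) : Int))).1.getD t 0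
          = if t < 2 ^ L ∧ t < 2 ^ L - 1 ∧ revN L t < 2 ^ L - 1 then y0.getD (revN L t) 0 else y0.getD t 0) := by
  intro d
  induction d with
  | zero =>
    intro a ha ha1 y hylen hinv
    have h1 : (1:Nat) ≤ 2 ^ L := Nat.one_le_two_pow
    have hcastp : ((2:Nat) ^ L : Int) = (2:Int) ^ L := by push_cast; ring
    have hcast : ((a : Int)) = (2:Int) ^ L - 1 := by omega
    rw [hcast, PySem.List.pyRange_one_eq_nil (le_refl _)]
    simp only [List.foldl_nil]
    refine ⟨hylen, ?_⟩
    intro t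
    rw [hinv t, show a = 2 ^ L - 1 by omega]
  | succ d ih =>
    intro a ha ha1 y hylen hinv
    have h1 : (1:Nat) ≤ 2 ^ L := Nat.one_le_two_pow
    have hcastp : ((2:Nat) ^ L : Int) = (2:Int) ^ L := by push_cast; ring
    have halt : a < 2 ^ L - 1 := by omega
    have ha2 : a + 1 < 2 ^ L := by omega
    have hconsa : ((a : Int)) < (2:Int) ^ L - 1 := by omega
    rw [PySem.List.pyRange_one_cons hconsa]
    set b := revN L a with hbdef
    have hblt : b < 2 ^ L := revN_lt L a
    have hrevb : revN L b = a := revN_revN L a (by omega)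
    have hjup : jUpdateA ((b : Nat) : Int) (PySem.Int.floordiv ((2:Int) ^ L) 2) = ((revN L (a + 1) : Nat) : Int) := by
      obtain ⟨u, hu⟩ : ∃ u, L = u + 1 := ⟨L - 1, by omega⟩
      rw [hbdef, hu]
      rw [hu] at ha2
      rw [floordiv_pow2 u]
      have h6 := jUpdateA_rev (u + 1) (by omega) a ha2
      simpa only [Nat.add_sub_cancel] using h6
    simp only [List.foldl_cons, Int.toNat_natCast, hjup]
    have hcast1 : ((a : Int)) + 1 = ((a + 1 : Nat) : Int) := by push_cast; ring
    rw [hcast1]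
    set y' := (if ((b : Nat) : Int) ≤ ((a : Nat) : Int) then (y.set a (y.getD b 0)).set b (y.getD a 0) else y) with hy'
    have hylen' : y'.length = y0.length := by
      rw [hy']; split_ifs <;> simp [hylen]
    have hinv' : ∀ t : Nat, y'.getD t 0 =
        if t < 2 ^ L ∧ t < a + 1 ∧ revN L t < a + 1 then y0.getD (revN L t) 0 else y0.getD t 0 := by
      intro t
      have hyb : y.getD b 0 = y0.getD b 0 := by
        rw [hinv b]
        split_ifs with hc
        · obtain ⟨_, hb2, hb3⟩ := hc; rw [hrevb] at hb3; omega
        · rfl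
      have hya : y.getD a 0 = y0.getD a 0 := by
        rw [hinv a]; split_ifs with hc
        · omega
        · rfl
      by_cases hba : b ≤ a
      · have hba' : ((b : Nat) : Int) ≤ ((a : Nat) : Int) := by exact_mod_cast hba
        rw [hy', if_pos hba']
        by_cases htb : t = b
        · subst htb
          rw [pvGetD_set_self _ _ _ _ (by rw [List.length_set]; omega), hya]
          rw [if_pos ⟨hblt, by omega, by rw [hrevb]; omega⟩, hrevb]
        · rw [pvGetD_set_ne _ _ _ _ _ (fun h => htb h.symm)]
          by_cases hta : t = a
          · subst hta
            rw [pvGetD_set_self _ _ _ _ (by omega), hyb]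
            have h5 : revN L t = b := hbdef.symm
            rw [if_pos ⟨by omega, by omega, by omega⟩, h5]
          · rw [pvGetD_set_ne _ _ _ _ _ (fun h => hta h.symm), hinv t]
            by_cases ht2L : t < 2 ^ L
            · have hne2 : revN L t ≠ a := by
                intro he
                apply htb
                rw [← revN_revN L t ht2L, he, ← hbdef]
              have hiff : (t < 2 ^ L ∧ t < a + 1 ∧ revN L t < a + 1) ↔ (t < 2 ^ L ∧ t < a ∧ revN L t < a) := by
                omega
              rw [if_congr hiff rfl rfl]
            · have c1 : ¬ (t < 2 ^ L ∧ t < a + 1 ∧ revN L t < a + 1) := by omega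
              have c2 : ¬ (t < 2 ^ L ∧ t < a ∧ revN L t < a) := by omega
              rw [if_neg c2, if_neg c1]
      · have hba' : ¬ (((b : Nat) : Int) ≤ ((a : Nat) : Int)) := by exact_mod_cast hba
        rw [hy', if_neg hba', hinv t]
        by_cases ht2L : t < 2 ^ L
        · by_cases hta : t = a
          · have h5 : revN L t = b := by rw [hta]
            have c1 : ¬ (t < 2 ^ L ∧ t < a + 1 ∧ revN L t < a + 1) := by omega
            have c2 : ¬ (t < 2 ^ L ∧ t < a ∧ revN L t < a) := by omega
            rw [if_neg c2, if_neg c1]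
          · by_cases hrt : revN L t = a
            · have ht_b : t = b := by
                rw [← revN_revN L t ht2L, hrt]
              have c1 : ¬ (t < 2 ^ L ∧ t < a + 1 ∧ revN L t < a + 1) := by omega
              have c2 : ¬ (t < 2 ^ L ∧ t < a ∧ revN L t < a) := by omega
              rw [if_neg c2, if_neg c1]
            · have hiff : (t < 2 ^ L ∧ t < a + 1 ∧ revN L t < a + 1) ↔ (t < 2 ^ L ∧ t < a ∧ revN L t < a) := by
                omega
              rw [if_congr hiff rfl rfl]
        · have c1 : ¬ (t < 2 ^ L ∧ t < a + 1 ∧ revN L t < a + 1) := by omega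
          have c2 : ¬ (t < 2 ^ L ∧ t < a ∧ revN L t < a) := by omega
          rw [if_neg c2, if_neg c1]
    exact ih (a + 1) (by omega) (by omega) y' hylen' hinv'

theorem gather (L : Nat) (y0 : List Int) (hlen : 2 ^ L ≤ y0.length) :
    (swapLoopA ((2:Int) ^ L) (y0, PySem.Int.floordiv ((2:Int) ^ L) 2)).1.length = y0.length ∧
    ∀ t : Nat, (swapLoopA ((2:Int) ^ L) (y0, PySem.Int.floordiv ((2:Int) ^ L) 2)).1.getD t 0
      = if t < 2 ^ L then y0.getD (revN L t) 0 else y0.getD t 0 := by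
  rcases Nat.eq_zero_or_pos L with hL0 | hL1
  · subst hL0
    unfold swapLoopA
    rw [PySem.List.pyRange_one_eq_nil (by norm_num)]
    simp only [List.foldl_nil]
    refine ⟨by simp, ?_⟩
    intro t
    by_cases ht : t < 2 ^ 0
    · rw [if_pos ht, show t = 0 by omega]
      rfl
    · rw [if_neg ht]
  · unfold swapLoopA
    have h1 : (1:Nat) ≤ 2 ^ L := Nat.one_le_two_pow
    have hcastp : ((2:Nat) ^ L : Int) = (2:Int) ^ L := by push_cast; ring
    have hj0 : PySem.Int.floordiv ((2:Int) ^ L) 2 = ((revN L 1 : Nat) : Int) := by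
      obtain ⟨u, hu⟩ : ∃ u, L = u + 1 := ⟨L - 1, by omega⟩
      rw [hu, floordiv_pow2 u, revN_one (u + 1) (by omega), Nat.add_sub_cancel]
      push_cast; ring
    have hstart : ((1 : Int)) = ((1 : Nat) : Int) := by norm_num
    have hinit : ∀ t : Nat, y0.getD t 0 =
        if t < 2 ^ L ∧ t < 1 ∧ revN L t < 1 then y0.getD (revN L t) 0 else y0.getD t 0 := by
      intro t
      split_ifs with hc
      · rw [show t = 0 by omega, revN_zero]
      · rfl
    have h2L : (2:Nat) ≤ 2 ^ L := by
      calc (2:Nat) = 2 ^ 1 := rfl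
        _ ≤ 2 ^ L := Nat.pow_le_pow_right (by norm_num) hL1
    have := gather_loop L hL1 y0 hlen (2 ^ L - 1 - 1) 1 (by omega) (by omega) y0 rfl hinit
    rw [← hj0, ← hstart] at this
    refine ⟨this.1, ?_⟩
    intro t
    rw [this.2 t]
    by_cases ht : t < 2 ^ L
    · by_cases hlast : t = 2 ^ L - 1
      · subst hlast
        rw [revN_last L]
        rw [if_neg (by omega), if_pos ht]
      · by_cases hrlast : revN L t = 2 ^ L - 1
        · have : t = 2 ^ L - 1 := by
            have h2 := revN_last L
            exact revN_inj L ht (by omega) (by omega)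
          omega
        · have hrl := revN_lt L t
          rw [if_pos (by omega), if_pos ht]
    · have hrl := revN_lt L t
      rw [if_neg (by omega), if_neg ht]

-- ---- generic: a fold of updates on pairwise-disjoint index pairs ----

def upd2 {π : Type} (pos1 pos2 : π → Nat) (F G : π → Int → Int → Int) (y : List Int) (p : π) : List Int :=
  (y.set (pos1 p) (F p (y.getD (pos1 p) 0) (y.getD (pos2 p) 0))).set (pos2 p)
    (G p (y.getD (pos1 p) 0) (y.getD (pos2 p) 0))

theorem upd2_length {π : Type} (pos1 pos2 : π → Nat) (F G : π → Int → Int → Int) (y : List Int) (p : π) :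
    (upd2 pos1 pos2 F G y p).length = y.length := by
  simp [upd2]

theorem foldl_upd2_length {π : Type} (pos1 pos2 : π → Nat) (F G : π → Int → Int → Int) :
    ∀ (ps : List π) (y : List Int), (ps.foldl (upd2 pos1 pos2 F G) y).length = y.length := by
  intro ps
  induction ps with
  | nil => intro y; rfl
  | cons p ps ih =>
    intro y
    rw [List.foldl_cons, ih, upd2_length]

theorem foldl_upd2_untouched {π : Type} (pos1 pos2 : π → Nat) (F G : π → Int → Int → Int) :
    ∀ (ps : List π) (y : List Int) (t : Nat), (∀ p ∈ ps, pos1 p ≠ t ∧ pos2 p ≠ t) →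
      (ps.foldl (upd2 pos1 pos2 F G) y).getD t 0 = y.getD t 0 := by
  intro ps
  induction ps with
  | nil => intro y t _; rfl
  | cons p ps ih =>
    intro y t h
    rw [List.foldl_cons, ih _ t (fun q hq => h q (List.mem_cons_of_mem p hq))]
    have h1 := h p (List.mem_cons_self)
    unfold upd2
    rw [pvGetD_set_ne _ _ _ _ _ h1.2, pvGetD_set_ne _ _ _ _ _ h1.1]

theorem foldl_upd2_hit {π : Type} (pos1 pos2 : π → Nat) (F G : π → Int → Int → Int)
    (ps₁ : List π) (p : π) (ps₂ : List π) (y : List Int)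
    (hne : pos1 p ≠ pos2 p) (hl1 : pos1 p < y.length) (hl2 : pos2 p < y.length)
    (h1 : ∀ q ∈ ps₁, (pos1 q ≠ pos1 p ∧ pos2 q ≠ pos1 p) ∧ (pos1 q ≠ pos2 p ∧ pos2 q ≠ pos2 p))
    (h2 : ∀ q ∈ ps₂, (pos1 q ≠ pos1 p ∧ pos2 q ≠ pos1 p) ∧ (pos1 q ≠ pos2 p ∧ pos2 q ≠ pos2 p)) :
    ((ps₁ ++ p :: ps₂).foldl (upd2 pos1 pos2 F G) y).getD (pos1 p) 0
        = F p (y.getD (pos1 p) 0) (y.getD (pos2 p) 0)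
    ∧ ((ps₁ ++ p :: ps₂).foldl (upd2 pos1 pos2 F G) y).getD (pos2 p) 0
        = G p (y.getD (pos1 p) 0) (y.getD (pos2 p) 0) := by
  rw [List.foldl_append, List.foldl_cons]
  have hy1a : (ps₁.foldl (upd2 pos1 pos2 F G) y).getD (pos1 p) 0 = y.getD (pos1 p) 0 :=
    foldl_upd2_untouched pos1 pos2 F G ps₁ y (pos1 p) (fun q hq => (h1 q hq).1)
  have hy1b : (ps₁.foldl (upd2 pos1 pos2 F G) y).getD (pos2 p) 0 = y.getD (pos2 p) 0 :=
    foldl_upd2_untouched pos1 pos2 F G ps₁ y (pos2 p) (fun q hq => (h1 q hq).2)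
  have hlen1 : (ps₁.foldl (upd2 pos1 pos2 F G) y).length = y.length :=
    foldl_upd2_length pos1 pos2 F G ps₁ y
  have u1 : ∀ (z : List Int), pos1 p < z.length → (upd2 pos1 pos2 F G z p).getD (pos1 p) 0
      = F p (z.getD (pos1 p) 0) (z.getD (pos2 p) 0) := by
    intro z hz
    unfold upd2
    rw [pvGetD_set_ne _ _ _ _ _ (fun h => hne h.symm), pvGetD_set_self _ _ _ _ hz]
  have u2 : ∀ (z : List Int), pos2 p < z.length → (upd2 pos1 pos2 F G z p).getD (pos2 p) 0
      = G p (z.getD (pos1 p) 0) (z.getD (pos2 p) 0) := by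
    intro z hz
    unfold upd2
    rw [pvGetD_set_self _ _ _ _ (by rw [List.length_set]; exact hz)]
  constructor
  · rw [foldl_upd2_untouched pos1 pos2 F G ps₂ _ (pos1 p) (fun q hq => (h2 q hq).1),
        u1 _ (by rw [hlen1]; exact hl1), hy1a, hy1b]
  · rw [foldl_upd2_untouched pos1 pos2 F G ps₂ _ (pos2 p) (fun q hq => (h2 q hq).2),
        u2 _ (by rw [hlen1]; exact hl2), hy1a, hy1b]

theorem nested_foldl (ls : List Int) (g : Int → List Int) (f : List Int → Int → Int → List Int) (y : List Int) :
    ls.foldl (fun y j => (g j).foldl (fun y k => f y j k) y) y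
      = (ls.flatMap (fun j => (g j).map (fun k => ((j, k) : Int × Int)))).foldl (fun y p => f y p.1 p.2) y := by
  induction ls generalizing y with
  | nil => rfl
  | cons a ls ih =>
    rw [List.flatMap_cons, List.foldl_append, List.foldl_cons, List.foldl_map, ih]

-- arithmetic of the index pairs of one butterfly stage
theorem pair_pos_disjoint (l h : Int) (hh : 0 < h) (hl : l = 2 * h) {j' k' s t : Int}
    (hj0 : 0 ≤ j') (hj'h : j' < h) (hdk : l ∣ k' - j') (hs0 : 0 ≤ s) (hsh : s < h) (hdt : l ∣ t - s)
    (hne : ¬(j' = s ∧ k' = t)) :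
    k' ≠ t ∧ k' + h ≠ t ∧ k' ≠ t + h ∧ k' + h ≠ t + h := by
  obtain ⟨q, hq⟩ := hdk
  obtain ⟨qt, hqt⟩ := hdt
  have hk' : k' = j' + l * q := by linarith
  have ht' : t = s + l * qt := by linarith
  have e1 : k' % l = j' := by
    rw [hk', Int.add_mul_emod_self_left, Int.emod_eq_of_lt hj0 (by omega)]
  have e2 : t % l = s := by
    rw [ht', Int.add_mul_emod_self_left, Int.emod_eq_of_lt hs0 (by omega)]
  have e3 : (k' + h) % l = j' + h := by
    rw [show k' + h = (j' + h) + l * q by omega, Int.add_mul_emod_self_left,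
        Int.emod_eq_of_lt (by omega) (by omega)]
  have e4 : (t + h) % l = s + h := by
    rw [show t + h = (s + h) + l * qt by omega, Int.add_mul_emod_self_left,
        Int.emod_eq_of_lt (by omega) (by omega)]
  refine ⟨?_, ?_, ?_, ?_⟩
  · intro he
    rw [he, e2] at e1
    exact hne ⟨e1.symm, by omega⟩
  · intro he
    rw [he, e2] at e3
    omega
  · intro he
    rw [he, e4] at e1
    omega
  · intro he
    have : k' = t := by omega
    rw [this, e2] at e1
    exact hne ⟨e1.symm, by omega⟩

-- ---- the functional butterfly tower (proof-side model of A's staged loops) ----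

def stageB (r : List Int) (md m n l : Int) (y : List Int) : List Int :=
  let h := PySem.Int.floordiv l 2
  (PySem.List.pyRange 0 n 1).map (fun t =>
    let s := PySem.Int.mod t l
    if s < h then
      PySem.Int.mod (y.getD t.toNat 0 +
        PySem.Int.mod (PySem.List.pyGetD r (PySem.Int.floordiv (s * m) l) 0 * y.getD (t + h).toNat 0) md) md
    else
      PySem.Int.mod (y.getD (t - h).toNat 0 -
        PySem.Int.mod (PySem.List.pyGetD r (PySem.Int.floordiv ((s - h) * m) l) 0 * y.getD t.toNat 0) md) md)

def stagesB (r : List Int) (md m n : Int) : Nat → Int → List Int → List Int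
  | 0, _, y => y
  | c + 1, l, y => stagesB r md m n c (l * 2) (stageB r md m n l y)

-- ---- one butterfly stage of A, pointwise ----

theorem psL_mem {l n : Int} (hlpos : 0 < l) (q : Int × Int)
    (hq : q ∈ (PySem.List.pyRange 0 (PySem.Int.floordiv l 2) 1).flatMap
        (fun j => (PySem.List.pyRange j n l).map (fun k => ((j, k) : Int × Int)))) :
    0 ≤ q.1 ∧ q.1 < PySem.Int.floordiv l 2 ∧ q.1 ≤ q.2 ∧ q.2 < n ∧ l ∣ q.2 - q.1 := by
  rw [List.mem_flatMap] at hq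
  obtain ⟨j, hj, hq⟩ := hq
  rw [List.mem_map] at hq
  obtain ⟨k, hk, rfl⟩ := hq
  rw [PySem.List.mem_pyRange_one] at hj
  rw [PySem.List.mem_pyRange_iff_of_pos hlpos] at hk
  exact ⟨hj.1, hj.2, hk.1, hk.2.1, hk.2.2⟩

theorem psL_nodup {l n : Int} (hlpos : 0 < l) :
    ((PySem.List.pyRange 0 (PySem.Int.floordiv l 2) 1).flatMap
        (fun j => (PySem.List.pyRange j n l).map (fun k => ((j, k) : Int × Int)))).Nodup := by
  rw [List.nodup_flatMap]
  constructor
  · intro j _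
    apply List.Nodup.map
    · intro a b h
      exact congrArg Prod.snd h
    · rw [PySem.List.pyRange_of_pos _ _ hlpos]
      apply List.Nodup.map
      · intro a b h
        have h2 : l * (a : Int) = l * (b : Int) := by linarith
        exact_mod_cast mul_left_cancel₀ (by omega) h2
      · exact List.nodup_range
  · have hnd : (PySem.List.pyRange 0 (PySem.Int.floordiv l 2) 1).Nodup :=
      PySem.List.nodup_pyRange_one _ _
    apply List.Pairwise.imp ?_ hnd
    intro a b hab
    simp only [Function.onFun]
    rw [List.disjoint_left]
    intro x hx1 hx2
    rw [List.mem_map] at hx1 hx2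
    obtain ⟨k1, _, he1⟩ := hx1
    obtain ⟨k2, _, he2⟩ := hx2
    apply hab
    have h3 := he1.trans he2.symm
    exact congrArg Prod.fst h3

-- position bound: every pair of the stage touches only cells below n
theorem psL_pos_bound {l h n j' k' : Int} (hh : 0 < h) (hl : l = 2 * h) (hdvd : l ∣ n)
    (hj0 : 0 ≤ j') (hjh : j' < h) (hjk : j' ≤ k') (hkn : k' < n) (hdk : l ∣ k' - j') :
    k' + h < n := by
  obtain ⟨M, hM⟩ := hdvd
  obtain ⟨q, hq⟩ := hdk
  have hk' : k' = j' + l * q := by linarith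
  have hq0 : 0 ≤ q := by nlinarith
  have hqM : q < M := by nlinarith
  have : l * (q + 1) ≤ l * M := by
    apply mul_le_mul_of_nonneg_left (by omega) (by omega)
  nlinarith

theorem stage_pointwise (L e : Nat) (he1 : 1 ≤ e) (heL : e ≤ L) (r : List Int) (md m : Int) (n l : Int)
    (hn : n = (2:Int) ^ L) (hl : l = (2:Int) ^ e) (y : List Int) (hlen : 2 ^ L ≤ y.length) :
    ((PySem.List.pyRange 0 (PySem.Int.floordiv l 2) 1).foldl
        (fun y j => (PySem.List.pyRange j n l).foldl (butterflyA r md m l j) y) y).length = y.length ∧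
    ∀ t : Nat, ((PySem.List.pyRange 0 (PySem.Int.floordiv l 2) 1).foldl
        (fun y j => (PySem.List.pyRange j n l).foldl (butterflyA r md m l j) y) y).getD t 0 =
      if t < 2 ^ L then (stageB r md m n l y).getD t 0 else y.getD t 0 := by
  have hcast_e : ((2:Nat) ^ e : Int) = (2:Int) ^ e := by push_cast; ring
  have hcast_h : ((2:Nat) ^ (e - 1) : Int) = (2:Int) ^ (e - 1) := by push_cast; ring
  have hcast_L : ((2:Nat) ^ L : Int) = (2:Int) ^ L := by push_cast; ring
  have hee : (2:Nat) ^ e = 2 ^ (e - 1) + 2 ^ (e - 1) := by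
    have : (2:Nat) ^ e = 2 ^ (e - 1) * 2 := by
      rw [← pow_succ]; congr 1; omega
    omega
  have heL' : (2:Nat) ^ e ≤ 2 ^ L := Nat.pow_le_pow_right (by norm_num) heL
  have hh1 : (1:Nat) ≤ 2 ^ (e - 1) := Nat.one_le_two_pow
  have hlpos : 0 < l := by rw [hl]; positivity
  have hlcast : l = ((2 ^ e : Nat) : Int) := by rw [hl]; push_cast; ring
  have hfd : PySem.Int.floordiv l 2 = ((2:Nat) ^ (e - 1) : Int) := by
    obtain ⟨u, hu⟩ : ∃ u, e = u + 1 := ⟨e - 1, by omega⟩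
    subst hu
    rw [hl, floordiv_pow2 u, Nat.add_sub_cancel]
    push_cast; ring
  have hl2h : l = 2 * ((2:Nat) ^ (e - 1) : Int) := by
    obtain ⟨u, hu⟩ : ∃ u, e = u + 1 := ⟨e - 1, by omega⟩
    subst hu
    rw [hl, Nat.add_sub_cancel, pow_succ]
    push_cast; ring
  have hdvdn : l ∣ n := by
    rw [hl, hn]
    exact pow_dvd_pow 2 heL
  have hLsplit : (2:Nat) ^ L = 2 ^ e * 2 ^ (L - e) := by
    rw [← pow_add]; congr 1; omega
  set pos1 : Int × Int → Nat := fun p => p.2.toNat with hpos1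
  set pos2 : Int × Int → Nat := fun p => (p.2 + PySem.Int.floordiv l 2).toNat with hpos2
  set F : Int × Int → Int → Int → Int := fun p A B =>
    PySem.Int.mod (A + PySem.Int.mod (PySem.List.pyGetD r (PySem.Int.floordiv (p.1 * m) l) 0 * B) md) md with hF
  set G : Int × Int → Int → Int → Int := fun p A B =>
    PySem.Int.mod (A - PySem.Int.mod (PySem.List.pyGetD r (PySem.Int.floordiv (p.1 * m) l) 0 * B) md) md with hG
  set psL := (PySem.List.pyRange 0 (PySem.Int.floordiv l 2) 1).flatMap
      (fun j => (PySem.List.pyRange j n l).map (fun k => ((j, k) : Int × Int))) with hpsL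
  have hfold : ((PySem.List.pyRange 0 (PySem.Int.floordiv l 2) 1).foldl
        (fun y j => (PySem.List.pyRange j n l).foldl (butterflyA r md m l j) y) y)
      = psL.foldl (upd2 pos1 pos2 F G) y := by
    exact nested_foldl (PySem.List.pyRange 0 (PySem.Int.floordiv l 2) 1)
      (fun j => PySem.List.pyRange j n l) (fun y j k => butterflyA r md m l j y k) y
  rw [hfold]
  have hndp := psL_nodup (l := l) (n := n) hlpos
  rw [← hpsL] at hndp
  refine ⟨foldl_upd2_length pos1 pos2 F G psL y, ?_⟩
  intro t
  by_cases ht : t < 2 ^ L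
  · rw [if_pos ht]
    have htn : ((t:Nat) : Int) < n := by rw [hn, ← hcast_L]; exact_mod_cast ht
    have hsplitt : (t : Int) - ((t % 2 ^ e : Nat) : Int) = l * ((t / 2 ^ e : Nat) : Int) := by
      have h0 : 2 ^ e * (t / 2 ^ e) + t % 2 ^ e = t := Nat.div_add_mod t (2 ^ e)
      have h1 : ((2 ^ e : Nat) : Int) * ((t / 2 ^ e : Nat) : Int) + ((t % 2 ^ e : Nat) : Int)
          = ((t : Nat) : Int) := by exact_mod_cast h0
      rw [hlcast]
      linarith
    have hmodlt : t % 2 ^ e < 2 ^ e := Nat.mod_lt _ (by positivity)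
    have hmodle : t % 2 ^ e ≤ t := Nat.mod_le _ _
    have hstageB : (stageB r md m n l y).getD t 0 =
        (fun tI : Int =>
          if PySem.Int.mod tI l < PySem.Int.floordiv l 2 then
            PySem.Int.mod (y.getD tI.toNat 0 +
              PySem.Int.mod (PySem.List.pyGetD r (PySem.Int.floordiv (PySem.Int.mod tI l * m) l) 0 *
                y.getD (tI + PySem.Int.floordiv l 2).toNat 0) md) md
          else
            PySem.Int.mod (y.getD (tI - PySem.Int.floordiv l 2).toNat 0 -
              PySem.Int.mod (PySem.List.pyGetD r (PySem.Int.floordiv ((PySem.Int.mod tI l - PySem.Int.floordiv l 2) * m) l) 0 *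
                y.getD tI.toNat 0) md) md) ((t : Nat) : Int) := by
      unfold stageB
      rw [List.getD_eq_getElem?_getD, List.getElem?_map]
      have hlen2 : t < (PySem.List.pyRange 0 n 1).length := by
        rw [PySem.List.length_pyRange_one]
        omega
      rw [List.getElem?_eq_getElem hlen2]
      simp only [Option.map_some, Option.getD_some]
      rw [PySem.List.getElem_pyRange_one 0 n t hlen2]
      norm_num
    have hmodt : PySem.Int.mod ((t : Nat) : Int) l = ((t % 2 ^ e : Nat) : Int) := by
      rw [hl, ← hcast_e]
      exact_mod_cast PySem.Int.mod_natCast t (2 ^ e)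
    by_cases hcase : t % 2 ^ e < 2 ^ (e - 1)
    · -- first half of a pair: cell t is pos1 of (s, t)
      set p : Int × Int := (((t % 2 ^ e : Nat) : Int), ((t : Nat) : Int)) with hp
      have hIcast : ((2:Nat) ^ (e - 1) : Int) = (((2:Nat) ^ (e - 1) : Nat) : Int) := by push_cast; ring
      have hmem : p ∈ psL := by
        rw [hpsL, List.mem_flatMap]
        refine ⟨((t % 2 ^ e : Nat) : Int), ?_, ?_⟩
        · rw [PySem.List.mem_pyRange_one, hfd]
          constructor
          · positivity
          · rw [hIcast]; exact_mod_cast hcase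
        · rw [List.mem_map]
          exact ⟨((t : Nat) : Int), by
            rw [PySem.List.mem_pyRange_iff_of_pos hlpos]
            exact ⟨by exact_mod_cast hmodle, htn, ⟨((t / 2 ^ e : Nat) : Int), hsplitt⟩⟩, rfl⟩
      obtain ⟨ps₁, ps₂, hsplit⟩ := List.append_of_mem hmem
      have hnotmem : p ∉ ps₁ ∧ p ∉ ps₂ := by
        rw [hsplit] at hndp
        rw [List.nodup_middle, List.nodup_cons] at hndp
        constructor
        · intro hc; exact hndp.1 (List.mem_append_left _ hc)
        · intro hc; exact hndp.1 (List.mem_append_right _ hc)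
      have hcase' : ((t % 2 ^ e : Nat) : Int) < ((2:Nat) ^ (e - 1) : Int) := by
        rw [hIcast]; exact_mod_cast hcase
      have hdisj : ∀ q ∈ psL, q ≠ p →
          (pos1 q ≠ pos1 p ∧ pos2 q ≠ pos1 p) ∧ (pos1 q ≠ pos2 p ∧ pos2 q ≠ pos2 p) := by
        intro q hq hqp
        obtain ⟨hq1, hq2, hq3, hq4, hq5⟩ := psL_mem hlpos q (hpsL ▸ hq)
        have hd := pair_pos_disjoint l (PySem.Int.floordiv l 2) (by rw [hfd]; positivity)
          (by rw [hfd]; exact hl2h) hq1 hq2 hq5 (by positivity)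
          (by rw [hfd]; exact hcase') ⟨((t / 2 ^ e : Nat) : Int), hsplitt⟩
          (by intro hc; exact hqp (Prod.ext hc.1 hc.2))
        rw [hfd] at hd hq2
        have hk0 : 0 ≤ q.2 := le_trans hq1 hq3
        have hh0 : (0:Int) < ((2:Nat) ^ (e - 1) : Int) := by positivity
        simp only [hpos1, hpos2, hp, hfd, Int.toNat_natCast]
        refine ⟨⟨?_, ?_⟩, ⟨?_, ?_⟩⟩ <;> intro hc
        · exact hd.1 (by omega)
        · exact hd.2.1 (by omega)
        · exact hd.2.2.1 (by omega)
        · exact hd.2.2.2 (by omega)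
      have hthin : t + 2 ^ (e - 1) < 2 ^ L := by
        have hB : t / 2 ^ e < 2 ^ (L - e) := by
          apply Nat.div_lt_of_lt_mul
          omega
        have h2 : 2 ^ e * (t / 2 ^ e) + 2 ^ e ≤ 2 ^ e * 2 ^ (L - e) := by
          have h3 := Nat.mul_le_mul_left (2 ^ e) (Nat.succ_le_of_lt hB)
          rw [Nat.mul_succ] at h3
          omega
        have h0 := Nat.div_add_mod t (2 ^ e)
        omega
      have hh0 : (0:Int) < ((2:Nat) ^ (e - 1) : Int) := by positivity
      have hhit := foldl_upd2_hit pos1 pos2 F G ps₁ p ps₂ y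
        (by simp only [hpos1, hpos2, hp, hfd, Int.toNat_natCast]; omega)
        (by simp only [hpos1, hp, Int.toNat_natCast]; omega)
        (by simp only [hpos2, hp, hfd]; rw [hIcast]; omega)
        (fun q hq => hdisj q (by rw [hsplit]; exact List.mem_append_left _ hq) (by intro hc; exact hnotmem.1 (hc ▸ hq)))
        (fun q hq => hdisj q (by rw [hsplit]; exact List.mem_append_right _ (List.mem_cons_of_mem _ hq)) (by intro hc; exact hnotmem.2 (hc ▸ hq)))
      rw [← hsplit] at hhit
      have hpos1p : pos1 p = t := by simp only [hpos1, hp, Int.toNat_natCast]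
      rw [hpos1p] at hhit
      rw [hhit.1, hstageB]
      simp only [hmodt]
      rw [if_pos (by rw [hfd]; exact hcase')]
      simp only [hpos2, hp, hF, Int.toNat_natCast]
    · -- second half of a pair: cell t is pos2 of (s - h, t - h)
      have hIcast : ((2:Nat) ^ (e - 1) : Int) = (((2:Nat) ^ (e - 1) : Nat) : Int) := by push_cast; ring
      have hsge : 2 ^ (e - 1) ≤ t % 2 ^ e := by omega
      have htge : 2 ^ (e - 1) ≤ t := le_trans hsge hmodle
      have hsgeI : ((2:Nat) ^ (e - 1) : Int) ≤ ((t % 2 ^ e : Nat) : Int) := by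
        rw [hIcast]; exact_mod_cast hsge
      have htgeI : ((2:Nat) ^ (e - 1) : Int) ≤ ((t : Nat) : Int) := by
        rw [hIcast]; exact_mod_cast htge
      have hh0 : (0:Int) < ((2:Nat) ^ (e - 1) : Int) := by positivity
      set p : Int × Int := (((t % 2 ^ e : Nat) : Int) - ((2:Nat) ^ (e - 1) : Int),
        ((t : Nat) : Int) - ((2:Nat) ^ (e - 1) : Int)) with hp
      have hsplitt2 : (((t : Nat) : Int) - ((2:Nat) ^ (e - 1) : Int))
          - (((t % 2 ^ e : Nat) : Int) - ((2:Nat) ^ (e - 1) : Int))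
          = l * ((t / 2 ^ e : Nat) : Int) := by linarith [hsplitt]
      have hmem : p ∈ psL := by
        rw [hpsL, List.mem_flatMap]
        refine ⟨((t % 2 ^ e : Nat) : Int) - ((2:Nat) ^ (e - 1) : Int), ?_, ?_⟩
        · rw [PySem.List.mem_pyRange_one, hfd]
          have hmm : ((t % 2 ^ e : Nat) : Int) < ((2:Nat) ^ (e - 1) : Int) + ((2:Nat) ^ (e - 1) : Int) := by
            rw [hIcast]
            exact_mod_cast show t % 2 ^ e < 2 ^ (e - 1) + 2 ^ (e - 1) by omega
          constructor <;> omega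
        · rw [List.mem_map]
          refine ⟨((t : Nat) : Int) - ((2:Nat) ^ (e - 1) : Int), ?_, rfl⟩
          rw [PySem.List.mem_pyRange_iff_of_pos hlpos]
          have hml : ((t % 2 ^ e : Nat) : Int) ≤ ((t : Nat) : Int) := by exact_mod_cast hmodle
          exact ⟨by omega, by omega, ⟨((t / 2 ^ e : Nat) : Int), hsplitt2⟩⟩
      obtain ⟨ps₁, ps₂, hsplit⟩ := List.append_of_mem hmem
      have hnotmem : p ∉ ps₁ ∧ p ∉ ps₂ := by
        rw [hsplit] at hndp
        rw [List.nodup_middle, List.nodup_cons] at hndp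
        constructor
        · intro hc; exact hndp.1 (List.mem_append_left _ hc)
        · intro hc; exact hndp.1 (List.mem_append_right _ hc)
      have hdisj : ∀ q ∈ psL, q ≠ p →
          (pos1 q ≠ pos1 p ∧ pos2 q ≠ pos1 p) ∧ (pos1 q ≠ pos2 p ∧ pos2 q ≠ pos2 p) := by
        intro q hq hqp
        obtain ⟨hq1, hq2, hq3, hq4, hq5⟩ := psL_mem hlpos q (hpsL ▸ hq)
        have hsmh : ((t % 2 ^ e : Nat) : Int) < ((2:Nat) ^ (e - 1) : Int) + ((2:Nat) ^ (e - 1) : Int) := by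
          rw [hIcast]
          exact_mod_cast show t % 2 ^ e < 2 ^ (e - 1) + 2 ^ (e - 1) by omega
        have hd := pair_pos_disjoint l (PySem.Int.floordiv l 2) (by rw [hfd]; positivity)
          (by rw [hfd]; exact hl2h) hq1 hq2 hq5 (by omega)
          (by rw [hfd]; omega)
          ⟨((t / 2 ^ e : Nat) : Int), hsplitt2⟩
          (by intro hc; exact hqp (Prod.ext hc.1 hc.2))
        rw [hfd] at hd hq2
        have hk0 : 0 ≤ q.2 := le_trans hq1 hq3
        simp only [hpos1, hpos2, hp, hfd]
        refine ⟨⟨?_, ?_⟩, ⟨?_, ?_⟩⟩ <;> intro hc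
        · exact hd.1 (by omega)
        · exact hd.2.1 (by omega)
        · exact hd.2.2.1 (by omega)
        · exact hd.2.2.2 (by omega)
      have hhit := foldl_upd2_hit pos1 pos2 F G ps₁ p ps₂ y
        (by simp only [hpos1, hpos2, hp, hfd]; omega)
        (by simp only [hpos1, hp]; omega)
        (by simp only [hpos2, hp, hfd]; omega)
        (fun q hq => hdisj q (by rw [hsplit]; exact List.mem_append_left _ hq) (by intro hc; exact hnotmem.1 (hc ▸ hq)))
        (fun q hq => hdisj q (by rw [hsplit]; exact List.mem_append_right _ (List.mem_cons_of_mem _ hq)) (by intro hc; exact hnotmem.2 (hc ▸ hq)))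
      rw [← hsplit] at hhit
      have hpos2p : pos2 p = t := by
        simp only [hpos2, hp, hfd]
        omega
      rw [hpos2p] at hhit
      rw [hhit.2, hstageB]
      simp only [hmodt]
      rw [if_neg (by rw [hfd]; omega)]
      rw [hfd]
      simp only [hpos1, hp, hG, Int.toNat_natCast]
  · rw [if_neg ht]
    refine foldl_upd2_untouched pos1 pos2 F G psL y t ?_
    intro q hq
    obtain ⟨hq1, hq2, hq3, hq4, hq5⟩ := psL_mem hlpos q (hpsL ▸ hq)
    have hk0 : 0 ≤ q.2 := le_trans hq1 hq3
    have hbound := psL_pos_bound (l := l) (h := PySem.Int.floordiv l 2)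
      (by rw [hfd]; positivity) (by rw [hfd]; exact hl2h) hdvdn hq1 hq2 hq3 hq4 hq5
    have hfd0 : 0 ≤ PySem.Int.floordiv l 2 := by rw [hfd]; positivity
    have hnL : n = ((2:Nat) ^ L : Int) := by rw [hn, hcast_L]
    have hnLc : ((2:Nat) ^ L : Int) = (((2:Nat) ^ L : Nat) : Int) := by push_cast; ring
    rw [hnL, hnLc] at hq4 hbound
    constructor
    · simp only [hpos1]; omega
    · simp only [hpos2]; omega

-- ---- indexing helpers ----

theorem getD_map_pyRange0 (f : Int → Int) (n : Int) (t : Nat) (ht : ((t:Nat) : Int) < n) :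
    ((PySem.List.pyRange 0 n 1).map f).getD t 0 = f ((t : Nat) : Int) := by
  rw [List.getD_eq_getElem?_getD, List.getElem?_map]
  have hlen2 : t < (PySem.List.pyRange 0 n 1).length := by
    rw [PySem.List.length_pyRange_one]; omega
  rw [List.getElem?_eq_getElem hlen2]
  simp only [Option.map_some, Option.getD_some]
  rw [PySem.List.getElem_pyRange_one 0 n t hlen2]
  norm_num

theorem getD_zip_map (y1 y2 : List Int) (f : Int × Int → Int) (t : Nat)
    (h1 : t < y1.length) (h2 : t < y2.length) :
    ((y1.zip y2).map f).getD t 0 = f (y1.getD t 0, y2.getD t 0) := by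
  have hz : t < (y1.zip y2).length := by rw [List.length_zip]; omega
  rw [List.getD_eq_getElem?_getD, List.getElem?_map, List.getElem?_eq_getElem hz]
  simp only [Option.map_some, Option.getD_some]
  rw [List.getElem_zip, List.getD_eq_getElem _ _ h1, List.getD_eq_getElem _ _ h2]

theorem stageB_length (r : List Int) (md m n l : Int) (y : List Int) :
    (stageB r md m n l y).length = (n - 0).toNat := by
  unfold stageB
  rw [List.length_map, PySem.List.length_pyRange_one]

theorem pvThin (L e t : Nat) (he1 : 1 ≤ e) (heL : e ≤ L) (ht : t < 2 ^ L)
    (hc : t % 2 ^ e < 2 ^ (e - 1)) : t + 2 ^ (e - 1) < 2 ^ L := by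
  have hLsplit : (2:Nat) ^ L = 2 ^ e * 2 ^ (L - e) := by
    rw [← pow_add]; congr 1; omega
  have hee : (2:Nat) ^ e = 2 ^ (e - 1) + 2 ^ (e - 1) := by
    have : (2:Nat) ^ e = 2 ^ (e - 1) * 2 := by rw [← pow_succ]; congr 1; omega
    omega
  have hB : t / 2 ^ e < 2 ^ (L - e) := by
    apply Nat.div_lt_of_lt_mul
    omega
  have h2 : 2 ^ e * (t / 2 ^ e) + 2 ^ e ≤ 2 ^ e * 2 ^ (L - e) := by
    have h3 := Nat.mul_le_mul_left (2 ^ e) (Nat.succ_le_of_lt hB)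
    rw [Nat.mul_succ] at h3
    omega
  have h0 := Nat.div_add_mod t (2 ^ e)
  omega

theorem stageB_congr (L e : Nat) (he1 : 1 ≤ e) (heL : e ≤ L) (r : List Int) (md m n l : Int)
    (hn : n = (2:Int) ^ L) (hl : l = (2:Int) ^ e) (y₁ y₂ : List Int)
    (h : ∀ t : Nat, t < 2 ^ L → y₁.getD t 0 = y₂.getD t 0) :
    stageB r md m n l y₁ = stageB r md m n l y₂ := by
  unfold stageB
  apply List.map_congr_left
  intro i hi
  rw [PySem.List.mem_pyRange_one] at hi
  obtain ⟨t, rfl⟩ : ∃ t : Nat, i = ((t : Nat) : Int) := ⟨i.toNat, by omega⟩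
  have hcast_L : ((2:Nat) ^ L : Int) = (2:Int) ^ L := by push_cast; ring
  have ht : t < 2 ^ L := by
    rw [hn, ← hcast_L] at hi
    exact_mod_cast hi.2
  have hfd : PySem.Int.floordiv l 2 = ((2:Nat) ^ (e - 1) : Int) := by
    obtain ⟨u, hu⟩ : ∃ u, e = u + 1 := ⟨e - 1, by omega⟩
    subst hu
    rw [hl, floordiv_pow2 u, Nat.add_sub_cancel]
    push_cast; ring
  have hIcast : ((2:Nat) ^ (e - 1) : Int) = (((2:Nat) ^ (e - 1) : Nat) : Int) := by push_cast; ring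
  have hmodt : PySem.Int.mod ((t : Nat) : Int) l = ((t % 2 ^ e : Nat) : Int) := by
    have hlcast : l = ((2 ^ e : Nat) : Int) := by rw [hl]; push_cast; ring
    rw [hlcast]
    exact_mod_cast PySem.Int.mod_natCast t (2 ^ e)
  have hh0 : (0:Int) < ((2:Nat) ^ (e - 1) : Int) := by positivity
  simp only [hmodt, hfd]
  by_cases hc : ((t % 2 ^ e : Nat) : Int) < ((2:Nat) ^ (e - 1) : Int)
  · rw [if_pos hc, if_pos hc]
    have hcN : t % 2 ^ e < 2 ^ (e - 1) := by
      rw [hIcast] at hc; exact_mod_cast hc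
    have hthin := pvThin L e t he1 heL ht hcN
    have hsum : (((t : Nat) : Int) + ((2:Nat) ^ (e - 1) : Int)).toNat = t + 2 ^ (e - 1) := by
      rw [hIcast]; omega
    simp only [Int.toNat_natCast, hsum]
    rw [h t ht, h (t + 2 ^ (e - 1)) hthin]
  · rw [if_neg hc, if_neg hc]
    have hsub : (((t : Nat) : Int) - ((2:Nat) ^ (e - 1) : Int)).toNat = t - 2 ^ (e - 1) := by
      rw [hIcast]; omega
    have hmodle : t % 2 ^ e ≤ t := Nat.mod_le _ _
    have hge : 2 ^ (e - 1) ≤ t := by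
      rw [hIcast] at hc
      have : 2 ^ (e - 1) ≤ t % 2 ^ e := by exact_mod_cast not_lt.mp hc
      omega
    simp only [Int.toNat_natCast, hsub]
    rw [h t ht, h (t - 2 ^ (e - 1)) (by omega)]

-- ---- the stage towers agree ----

theorem stages_eq (L : Nat) (r : List Int) (md m n : Int) (hn : n = (2:Int) ^ L) :
    ∀ (c : Nat), c ≤ L → ∀ (l : Int), l = (2:Int) ^ (L - c + 1) → ∀ (yA zB : List Int),
      2 ^ L ≤ yA.length → zB.length = 2 ^ L → (∀ t : Nat, t < 2 ^ L → yA.getD t 0 = zB.getD t 0) →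
      (stagesA r md m n c l yA).length = yA.length ∧
      (stagesB r md m n c l zB).length = 2 ^ L ∧
      (∀ t : Nat, t < 2 ^ L → (stagesA r md m n c l yA).getD t 0 = (stagesB r md m n c l zB).getD t 0) := by
  intro c
  induction c with
  | zero =>
    intro _ l _ yA zB _ hzB hagree
    exact ⟨rfl, hzB, hagree⟩
  | succ c ih =>
    intro hcL l hl yA zB hyA hzB hagree
    have he1 : 1 ≤ L - c := by omega
    have hl' : l = (2:Int) ^ (L - c) := by rw [hl]; congr 1; omega
    have hsp := stage_pointwise L (L - c) he1 (by omega) r md m n l hn hl' yA hyA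
    show (stagesA r md m n c (l * 2) _).length = _ ∧ (stagesB r md m n c (l * 2) _).length = _ ∧ _
    have hlen' : 2 ^ L ≤ ((PySem.List.pyRange 0 (PySem.Int.floordiv l 2) 1).foldl
        (fun y j => (PySem.List.pyRange j n l).foldl (butterflyA r md m l j) y) yA).length := by
      rw [hsp.1]; exact hyA
    have hzB' : (stageB r md m n l zB).length = 2 ^ L := by
      rw [stageB_length, hn]
      have : ((2:Nat) ^ L : Int) = (2:Int) ^ L := by push_cast; ring
      omega
    have hagree' : ∀ t : Nat, t < 2 ^ L →
        ((PySem.List.pyRange 0 (PySem.Int.floordiv l 2) 1).foldl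
          (fun y j => (PySem.List.pyRange j n l).foldl (butterflyA r md m l j) y) yA).getD t 0
        = (stageB r md m n l zB).getD t 0 := by
      intro t ht
      rw [hsp.2 t, if_pos ht,
          stageB_congr L (L - c) he1 (by omega) r md m n l hn hl' yA zB hagree]
    have hl2 : l * 2 = (2:Int) ^ (L - c + 1) := by
      rw [hl', pow_succ]
    have := ih (by omega) (l * 2) hl2 _ _ hlen' hzB' hagree'
    exact ⟨by rw [this.1, hsp.1], this.2.1, this.2.2⟩

-- ---- padding ----

theorem pad_eq (p : List Int) (n : Int) :
    (PySem.List.pyRange ((p.length : Nat) : Int) n 1).foldl (fun y _ => y ++ [(0:Int)]) p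
      = p ++ List.replicate (n - (p.length : Int)).toNat 0 := by
  rw [PySem.List.foldl_append_singleton_eq_map (f := fun _ => (0:Int))]
  rw [List.map_const', PySem.List.length_pyRange_one]

theorem padded_getD (p : List Int) (k q : Nat) :
    (p ++ List.replicate k 0).getD q 0 = if q < p.length then p.getD q 0 else 0 := by
  by_cases h : q < p.length
  · rw [if_pos h]
    rw [List.getD_eq_getElem?_getD, List.getElem?_append_left h, ← List.getD_eq_getElem?_getD]
  · rw [if_neg h]
    rw [List.getD_eq_getElem?_getD, List.getElem?_append_right (by omega), List.getElem?_replicate]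
    split_ifs <;> rfl

theorem natCast_two_pow (L : Nat) : ((2 ^ L : Nat) : Int) = (2:Int) ^ L := by push_cast; ring

theorem toNat_two_pow_sub_zero (L : Nat) : ((2:Int) ^ L - 0).toNat = 2 ^ L := by
  rw [sub_zero, ← natCast_two_pow, Int.toNat_natCast]

theorem getD_map_lt (z : List Int) (f : Int → Int) (t : Nat) (h : t < z.length) :
    (z.map f).getD t 0 = f (z.getD t 0) := by
  rw [List.getD_eq_getElem?_getD, List.getElem?_map, List.getElem?_eq_getElem h]
  simp only [Option.map_some, Option.getD_some]
  rw [List.getD_eq_getElem _ _ h]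

-- ---- the bit-reversal gather list ----

def gatherL (p : List Int) (L : Nat) : List Int :=
  (List.range (2 ^ L)).map (fun q => if revN L q < p.length then p.getD (revN L q) 0 else 0)

theorem gatherL_length (p : List Int) (L : Nat) : (gatherL p L).length = 2 ^ L := by
  unfold gatherL
  rw [List.length_map, List.length_range]

theorem gatherL_getD (p : List Int) (L : Nat) (q : Nat) (hq : q < 2 ^ L) :
    (gatherL p L).getD q 0 = if revN L q < p.length then p.getD (revN L q) 0 else 0 := by
  unfold gatherL
  rw [List.getD_eq_getElem?_getD, List.getElem?_map, List.getElem?_range hq]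
  rfl

-- ---- the whole transform: A's padded/swapped/staged tower vs the gathered functional tower ----

theorem ntt_core_eq (L : Nat) (pA pB r : List Int) (md m : Int)
    (hread : ∀ q : Nat, q < 2 ^ L →
      (if q < pA.length then pA.getD q 0 else 0) = (if q < pB.length then pB.getD q 0 else 0)) :
    (stagesB r md m ((2:Int) ^ L) L 2 (gatherL pB L)).length = 2 ^ L ∧
    ∀ t : Nat, t < 2 ^ L →
      (stagesA r md m ((2:Int) ^ L) L 2
        (swapLoopA ((2:Int) ^ L)
          (pA ++ List.replicate (((2:Int) ^ L) - (pA.length : Int)).toNat 0,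
           PySem.Int.floordiv ((2:Int) ^ L) 2)).1).getD t 0
      = (stagesB r md m ((2:Int) ^ L) L 2 (gatherL pB L)).getD t 0 := by
  set y0 := pA ++ List.replicate (((2:Int) ^ L) - (pA.length : Int)).toNat 0 with hy0
  have hy0len : y0.length = pA.length + (((2:Int) ^ L) - (pA.length : Int)).toNat := by
    rw [hy0, List.length_append, List.length_replicate]
  have hlen0 : 2 ^ L ≤ y0.length := by
    rw [hy0len, ← natCast_two_pow L]
    omega
  have hg := gather L y0 hlen0
  have hagree : ∀ t : Nat, t < 2 ^ L →
      (swapLoopA ((2:Int) ^ L) (y0, PySem.Int.floordiv ((2:Int) ^ L) 2)).1.getD t 0 = (gatherL pB L).getD t 0 := by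
    intro t ht
    rw [hg.2 t, if_pos ht, gatherL_getD pB L t ht]
    have hrlt := revN_lt L t
    have h1 : y0.getD (revN L t) 0 = if revN L t < pA.length then pA.getD (revN L t) 0 else 0 :=
      padded_getD pA _ (revN L t)
    rw [h1, hread (revN L t) hrlt]
  have hseq := stages_eq L r md m ((2:Int) ^ L) rfl L (le_refl L) 2
    (by rw [Nat.sub_self]; norm_num) _ (gatherL pB L) (by rw [hg.1]; exact hlen0)
    (gatherL_length pB L) hagree
  exact ⟨hseq.2.1, hseq.2.2⟩

-- ---- bit arithmetic helpers ----

theorem bitDecomp (t k : Nat) : t % 2 ^ (k + 1) = t % 2 ^ k + (t / 2 ^ k % 2) * 2 ^ k := by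
  have hpk : (0:Nat) < 2 ^ k := Nat.two_pow_pos k
  have hs : t % 2 ^ k < 2 ^ k := Nat.mod_lt _ hpk
  have hb2 : t / 2 ^ k % 2 < 2 := Nat.mod_lt _ (by omega)
  have h1 : t / 2 ^ k = 2 * (t / 2 ^ k / 2) + t / 2 ^ k % 2 := by omega
  have hrepr : t = (t / 2 ^ k % 2 * 2 ^ k + t % 2 ^ k) + (t / 2 ^ k / 2) * 2 ^ (k + 1) := by
    calc t = 2 ^ k * (t / 2 ^ k) + t % 2 ^ k := (Nat.div_add_mod t (2 ^ k)).symm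
      _ = (2 * (t / 2 ^ k / 2) + t / 2 ^ k % 2) * 2 ^ k + t % 2 ^ k := by rw [← h1]; ring_nf
      _ = (t / 2 ^ k % 2 * 2 ^ k + t % 2 ^ k) + (t / 2 ^ k / 2) * 2 ^ (k + 1) := by
            rw [pow_succ]; ring
  have hle : t / 2 ^ k % 2 * 2 ^ k ≤ 2 ^ k := by
    calc t / 2 ^ k % 2 * 2 ^ k ≤ 1 * 2 ^ k := Nat.mul_le_mul_right _ (by omega)
      _ = 2 ^ k := one_mul _
  have hlt : t / 2 ^ k % 2 * 2 ^ k + t % 2 ^ k < 2 ^ (k + 1) := by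
    have : (2:Nat) ^ (k + 1) = 2 * 2 ^ k := by rw [pow_succ]; ring
    omega
  conv_lhs => rw [hrepr]
  rw [Nat.add_mul_mod_self_right, Nat.mod_eq_of_lt hlt]
  omega

-- bit k of d * 2^k + q (q < 2^k) is the parity of d
theorem bit_of_base (d q k : Nat) (hq : q < 2 ^ k) : (d * 2 ^ k + q) / 2 ^ k % 2 = d % 2 := by
  rw [show d * 2 ^ k + q = q + d * 2 ^ k by ring,
      Nat.add_mul_div_right _ _ (Nat.two_pow_pos k), Nat.div_eq_of_lt hq, Nat.zero_add]

-- ---- the exact twiddle-product coefficients ----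

def wgt (r : List Int) (m : Int) (i t : Nat) : Int :=
  PySem.List.pyGetD r (PySem.Int.floordiv (((t % 2 ^ i : Nat) : Int) * m) ((2:Int) ^ (i + 1))) 0

def facE (r : List Int) (m : Int) (i t p : Nat) : Int :=
  if p / 2 ^ i % 2 = 1 then (if t / 2 ^ i % 2 = 1 then -(wgt r m i t) else wgt r m i t) else 1

def Cex (r : List Int) (m : Int) (K t p : Nat) : Int := ∏ i ∈ Finset.range K, facE r m i t p

def Sex (r : List Int) (m : Int) (y0 : List Int) (K t : Nat) : Int :=
  ∑ q ∈ Finset.range (2 ^ K), Cex r m K t (t / 2 ^ K * 2 ^ K + q) * y0.getD (t / 2 ^ K * 2 ^ K + q) 0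

theorem facE_congr (r : List Int) (m : Int) (i t t' p : Nat) (h : t % 2 ^ (i + 1) = t' % 2 ^ (i + 1)) :
    facE r m i t p = facE r m i t' p := by
  have hp : (0:Nat) < 2 ^ i := Nat.two_pow_pos i
  have hmod : t % 2 ^ i = t' % 2 ^ i := by
    have h1 : t % 2 ^ (i + 1) % 2 ^ i = t % 2 ^ i := Nat.mod_mod_of_dvd t ⟨2, (pow_succ 2 i)⟩
    have h2 : t' % 2 ^ (i + 1) % 2 ^ i = t' % 2 ^ i := Nat.mod_mod_of_dvd t' ⟨2, (pow_succ 2 i)⟩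
    rw [← h1, ← h2, h]
  have hbit : t / 2 ^ i % 2 = t' / 2 ^ i % 2 := by
    have b1 := bitDecomp t i
    have b2 := bitDecomp t' i
    have m1 : t / 2 ^ i % 2 < 2 := Nat.mod_lt _ (by omega)
    have m2 : t' / 2 ^ i % 2 < 2 := Nat.mod_lt _ (by omega)
    have hmul : t / 2 ^ i % 2 * 2 ^ i = t' / 2 ^ i % 2 * 2 ^ i := by omega
    exact Nat.eq_of_mul_eq_mul_right hp hmul
  unfold facE wgt
  rw [hbit, hmod]

theorem Cex_congr (r : List Int) (m : Int) (K t t' p : Nat) (h : t % 2 ^ K = t' % 2 ^ K) :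
    Cex r m K t p = Cex r m K t' p := by
  unfold Cex
  apply Finset.prod_congr rfl
  intro i hi
  rw [Finset.mem_range] at hi
  apply facE_congr
  have hd : (2:Nat) ^ (i + 1) ∣ 2 ^ K := pow_dvd_pow 2 (by omega)
  calc t % 2 ^ (i + 1) = t % 2 ^ K % 2 ^ (i + 1) := (Nat.mod_mod_of_dvd t hd).symm
    _ = t' % 2 ^ K % 2 ^ (i + 1) := by rw [h]
    _ = t' % 2 ^ (i + 1) := Nat.mod_mod_of_dvd t' hd

theorem sum_range_two_pow_succ (f : ℕ → Int) (k : Nat) :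
    ∑ q ∈ Finset.range (2 ^ (k + 1)), f q
      = ∑ q ∈ Finset.range (2 ^ k), f q + ∑ q ∈ Finset.range (2 ^ k), f (2 ^ k + q) := by
  have h : (2:Nat) ^ (k + 1) = 2 ^ k + 2 ^ k := by
    have : (2:Nat) ^ (k + 1) = 2 * 2 ^ k := by rw [pow_succ]; ring
    omega
  rw [h, Finset.sum_range_add]

-- ---- the two recurrences of the exact sum ----

theorem Sex_even (r : List Int) (m : Int) (y0 : List Int) (k t : Nat) (ht : t / 2 ^ k % 2 = 0) :
    Sex r m y0 (k + 1) t = Sex r m y0 k t + wgt r m k t * Sex r m y0 k (t + 2 ^ k) := by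
  have hpk : (0:Nat) < 2 ^ k := Nat.two_pow_pos k
  obtain ⟨e, he⟩ : ∃ e, t / 2 ^ k = 2 * e := ⟨t / 2 ^ k / 2, by omega⟩
  have hkey : t / 2 ^ (k + 1) = e := by
    rw [pow_succ, ← Nat.div_div_eq_div_mul, he]
    omega
  have hB : t / 2 ^ (k + 1) * 2 ^ (k + 1) = t / 2 ^ k * 2 ^ k := by
    rw [hkey, he, pow_succ]; ring
  have hbase2 : (t + 2 ^ k) / 2 ^ k * 2 ^ k = t / 2 ^ k * 2 ^ k + 2 ^ k := by
    rw [Nat.add_div_right _ hpk]; ring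
  unfold Sex
  rw [sum_range_two_pow_succ, hB, hbase2]
  congr 1
  · apply Finset.sum_congr rfl
    intro q hq
    rw [Finset.mem_range] at hq
    unfold Cex
    rw [Finset.prod_range_succ]
    have hfac : facE r m k t (t / 2 ^ k * 2 ^ k + q) = 1 := by
      unfold facE
      rw [bit_of_base _ _ _ hq, ht]
      norm_num
    rw [hfac, mul_one]
  · rw [Finset.mul_sum]
    apply Finset.sum_congr rfl
    intro q hq
    rw [Finset.mem_range] at hq
    have hidx : t / 2 ^ k * 2 ^ k + (2 ^ k + q) = (t / 2 ^ k + 1) * 2 ^ k + q := by ring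
    have hidx2 : (t / 2 ^ k + 1) * 2 ^ k + q = t / 2 ^ k * 2 ^ k + 2 ^ k + q := by ring
    rw [hidx]
    unfold Cex
    rw [Finset.prod_range_succ]
    have hfac : facE r m k t ((t / 2 ^ k + 1) * 2 ^ k + q) = wgt r m k t := by
      unfold facE
      rw [bit_of_base _ _ _ hq]
      rw [if_pos (show (t / 2 ^ k + 1) % 2 = 1 by omega), if_neg (by omega)]
    have hcg : (∏ i ∈ Finset.range k, facE r m i t ((t / 2 ^ k + 1) * 2 ^ k + q))
        = ∏ i ∈ Finset.range k, facE r m i (t + 2 ^ k) ((t / 2 ^ k + 1) * 2 ^ k + q) :=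
      Cex_congr r m k t (t + 2 ^ k) _ (Nat.add_mod_right t (2 ^ k)).symm
    rw [hfac, hcg, hidx2]
    ring

theorem Sex_odd (r : List Int) (m : Int) (y0 : List Int) (k t : Nat) (ht : t / 2 ^ k % 2 = 1) :
    Sex r m y0 (k + 1) t = Sex r m y0 k (t - 2 ^ k) - wgt r m k t * Sex r m y0 k t := by
  have hpk : (0:Nat) < 2 ^ k := Nat.two_pow_pos k
  obtain ⟨e, he⟩ : ∃ e, t / 2 ^ k = 2 * e + 1 := ⟨t / 2 ^ k / 2, by omega⟩
  have htk : 2 ^ k ≤ t := by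
    have h1 : 1 ≤ t / 2 ^ k := by omega
    calc (2:Nat) ^ k = 1 * 2 ^ k := by ring
      _ ≤ t / 2 ^ k * 2 ^ k := Nat.mul_le_mul_right _ h1
      _ ≤ t := Nat.div_mul_le_self t (2 ^ k)
  have hkey : t / 2 ^ (k + 1) = e := by
    rw [pow_succ, ← Nat.div_div_eq_div_mul, he]
    omega
  have hB : t / 2 ^ (k + 1) * 2 ^ (k + 1) = 2 * e * 2 ^ k := by
    rw [hkey, pow_succ]; ring
  have hds := Nat.div_add_mod t (2 ^ k)
  rw [he] at hds
  have hexp : (2:Nat) ^ k * (2 * e + 1) = 2 * e * 2 ^ k + 2 ^ k := by ring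
  have hsub : t - 2 ^ k = 2 * e * 2 ^ k + t % 2 ^ k := by omega
  have hml : t % 2 ^ k < 2 ^ k := Nat.mod_lt _ hpk
  have hbase1 : (t - 2 ^ k) / 2 ^ k * 2 ^ k = 2 * e * 2 ^ k := by
    rw [hsub, show 2 * e * 2 ^ k + t % 2 ^ k = t % 2 ^ k + 2 * e * 2 ^ k by ring,
        Nat.add_mul_div_right _ _ hpk, Nat.div_eq_of_lt hml, Nat.zero_add]
  have hbaset : t / 2 ^ k * 2 ^ k = 2 * e * 2 ^ k + 2 ^ k := by
    rw [he]; ring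
  have hmodsub : (t - 2 ^ k) % 2 ^ k = t % 2 ^ k := by
    rw [hsub, show 2 * e * 2 ^ k + t % 2 ^ k = t % 2 ^ k + 2 * e * 2 ^ k by ring,
        Nat.add_mul_mod_self_right, Nat.mod_eq_of_lt hml]
  unfold Sex
  rw [sum_range_two_pow_succ, hB, hbase1, hbaset, sub_eq_add_neg]
  congr 1
  · apply Finset.sum_congr rfl
    intro q hq
    rw [Finset.mem_range] at hq
    unfold Cex
    rw [Finset.prod_range_succ]
    have hfac : facE r m k t (2 * e * 2 ^ k + q) = 1 := by
      unfold facE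
      rw [bit_of_base _ _ _ hq]
      norm_num
    have hcg : (∏ i ∈ Finset.range k, facE r m i t (2 * e * 2 ^ k + q))
        = ∏ i ∈ Finset.range k, facE r m i (t - 2 ^ k) (2 * e * 2 ^ k + q) :=
      Cex_congr r m k t (t - 2 ^ k) _ hmodsub.symm
    rw [hfac, mul_one, hcg]
  · rw [Finset.mul_sum, ← Finset.sum_neg_distrib]
    apply Finset.sum_congr rfl
    intro q hq
    rw [Finset.mem_range] at hq
    have hidx : 2 * e * 2 ^ k + (2 ^ k + q) = (2 * e + 1) * 2 ^ k + q := by ring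
    have hidx2 : (2 * e + 1) * 2 ^ k + q = 2 * e * 2 ^ k + 2 ^ k + q := by ring
    rw [hidx]
    unfold Cex
    rw [Finset.prod_range_succ]
    have hfac : facE r m k t ((2 * e + 1) * 2 ^ k + q) = -(wgt r m k t) := by
      unfold facE
      rw [bit_of_base _ _ _ hq]
      rw [if_pos (by omega), if_pos ht]
    rw [hfac, hidx2]
    ring

-- ---- one butterfly stage evaluated at one cell ----

theorem stageB_entry (L k : Nat) (r : List Int) (md m : Int) (y : List Int) (t : Nat)
    (hkL : k < L) (ht : t < 2 ^ L) :
    (stageB r md m ((2:Int) ^ L) ((2:Int) ^ (k + 1)) y).getD t 0 =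
      if t / 2 ^ k % 2 = 0 then
        PySem.Int.mod (y.getD t 0 + PySem.Int.mod (wgt r m k t * y.getD (t + 2 ^ k) 0) md) md
      else
        PySem.Int.mod (y.getD (t - 2 ^ k) 0 - PySem.Int.mod (wgt r m k t * y.getD t 0) md) md := by
  have hcastL : ((t : Nat) : Int) < (2:Int) ^ L := by
    rw [← natCast_two_pow]; exact_mod_cast ht
  have hstage : (stageB r md m ((2:Int) ^ L) ((2:Int) ^ (k + 1)) y).getD t 0 =
      (fun tI : Int =>
        if PySem.Int.mod tI ((2:Int) ^ (k + 1)) < PySem.Int.floordiv ((2:Int) ^ (k + 1)) 2 then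
          PySem.Int.mod (y.getD tI.toNat 0 +
            PySem.Int.mod (PySem.List.pyGetD r (PySem.Int.floordiv (PySem.Int.mod tI ((2:Int) ^ (k + 1)) * m) ((2:Int) ^ (k + 1))) 0 *
              y.getD (tI + PySem.Int.floordiv ((2:Int) ^ (k + 1)) 2).toNat 0) md) md
        else
          PySem.Int.mod (y.getD (tI - PySem.Int.floordiv ((2:Int) ^ (k + 1)) 2).toNat 0 -
            PySem.Int.mod (PySem.List.pyGetD r (PySem.Int.floordiv ((PySem.Int.mod tI ((2:Int) ^ (k + 1)) - PySem.Int.floordiv ((2:Int) ^ (k + 1)) 2) * m) ((2:Int) ^ (k + 1))) 0 *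
              y.getD tI.toNat 0) md) md) ((t : Nat) : Int) := by
    unfold stageB
    rw [List.getD_eq_getElem?_getD, List.getElem?_map]
    have hlen2 : t < (PySem.List.pyRange 0 ((2:Int) ^ L) 1).length := by
      rw [PySem.List.length_pyRange_one, toNat_two_pow_sub_zero]
      exact ht
    rw [List.getElem?_eq_getElem hlen2]
    simp only [Option.map_some, Option.getD_some]
    rw [PySem.List.getElem_pyRange_one 0 ((2:Int) ^ L) t hlen2]
    norm_num
  rw [hstage]
  simp only []
  have hmodt : PySem.Int.mod ((t : Nat) : Int) ((2:Int) ^ (k + 1)) = ((t % 2 ^ (k + 1) : Nat) : Int) := by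
    rw [← natCast_two_pow (k + 1)]
    exact_mod_cast PySem.Int.mod_natCast t (2 ^ (k + 1))
  have hfd : PySem.Int.floordiv ((2:Int) ^ (k + 1)) 2 = ((2 ^ k : Nat) : Int) := by
    rw [floordiv_pow2 k, natCast_two_pow]
  have hbd := bitDecomp t k
  have hml : t % 2 ^ k < 2 ^ k := Nat.mod_lt _ (Nat.two_pow_pos k)
  have hb2 : t / 2 ^ k % 2 < 2 := Nat.mod_lt _ (by omega)
  rw [hmodt, hfd]
  by_cases hb : t / 2 ^ k % 2 = 0
  · rw [hb] at hbd
    have hmmN : t % 2 ^ (k + 1) = t % 2 ^ k := by omega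
    have hlt : ((t % 2 ^ (k + 1) : Nat) : Int) < ((2 ^ k : Nat) : Int) := by
      exact_mod_cast show t % 2 ^ (k + 1) < 2 ^ k by omega
    rw [if_pos hlt, if_pos hb, hmmN]
    have htn : ((((t : Nat) : Int)) + ((2 ^ k : Nat) : Int)).toNat = t + 2 ^ k := by
      rw [← Nat.cast_add, Int.toNat_natCast]
    rw [htn, Int.toNat_natCast]
    unfold wgt
    rfl
  · have hb1 : t / 2 ^ k % 2 = 1 := by omega
    rw [hb1] at hbd
    have hgeN : 2 ^ k ≤ t % 2 ^ (k + 1) := by omega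
    have hnlt : ¬ (((t % 2 ^ (k + 1) : Nat) : Int) < ((2 ^ k : Nat) : Int)) := by
      exact_mod_cast show ¬ (t % 2 ^ (k + 1) < 2 ^ k) by omega
    rw [if_neg hnlt, if_neg hb]
    have hsub1 : ((t % 2 ^ (k + 1) : Nat) : Int) - ((2 ^ k : Nat) : Int) = ((t % 2 ^ k : Nat) : Int) := by
      rw [← Nat.cast_sub hgeN]
      congr 1
      omega
    have htk : 2 ^ k ≤ t := by
      have := Nat.mod_le t (2 ^ (k + 1))
      omega
    have htn2 : ((((t : Nat) : Int)) - ((2 ^ k : Nat) : Int)).toNat = t - 2 ^ k := by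
      rw [← Nat.cast_sub htk, Int.toNat_natCast]
    rw [hsub1, htn2, Int.toNat_natCast]
    unfold wgt
    rfl

-- ---- mdeq invariant through the stages ----

theorem stage_sum (L k : Nat) (hkL : k < L) (r : List Int) (md m : Int) (hmd : md ≠ 0)
    (y0 y : List Int)
    (hinv : ∀ t, t < 2 ^ L → mdeq md (y.getD t 0) (Sex r m y0 k t)) :
    ∀ t, t < 2 ^ L →
      mdeq md ((stageB r md m ((2:Int) ^ L) ((2:Int) ^ (k + 1)) y).getD t 0) (Sex r m y0 (k + 1) t) := by
  intro t ht
  rw [stageB_entry L k r md m y t hkL ht]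
  have hpk : (0:Nat) < 2 ^ k := Nat.two_pow_pos k
  by_cases hb : t / 2 ^ k % 2 = 0
  · rw [if_pos hb, Sex_even r m y0 k t hb]
    have hbit : t % 2 ^ (k + 1) < 2 ^ k := by
      have hbd := bitDecomp t k
      rw [hb] at hbd
      have := Nat.mod_lt t hpk
      omega
    have ht2 : t + 2 ^ k < 2 ^ L := by
      have := pvThin L (k + 1) t (by omega) (by omega) ht (by simpa using hbit)
      simpa using this
    apply mdeq_trans (mdeq_mod_left hmd)
    apply mdeq_add hmd (hinv t ht)
    apply mdeq_trans (mdeq_mod_left hmd)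
    exact mdeq_mul hmd (mdeq_refl md _) (hinv (t + 2 ^ k) ht2)
  · rw [if_neg hb, Sex_odd r m y0 k t (by omega)]
    have ht2 : t - 2 ^ k < 2 ^ L := by omega
    apply mdeq_trans (mdeq_mod_left hmd)
    apply mdeq_sub hmd (hinv (t - 2 ^ k) ht2)
    apply mdeq_trans (mdeq_mod_left hmd)
    exact mdeq_mul hmd (mdeq_refl md _) (hinv t ht)

theorem stages_sum (L : Nat) (r : List Int) (md m : Int) (hmd : md ≠ 0) (y0 : List Int) :
    ∀ (c k : Nat), k + c = L → ∀ (l : Int), l = (2:Int) ^ (k + 1) → ∀ y : List Int,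
      (∀ t, t < 2 ^ L → mdeq md (y.getD t 0) (Sex r m y0 k t)) →
      ∀ t, t < 2 ^ L →
        mdeq md ((stagesB r md m ((2:Int) ^ L) c l y).getD t 0) (Sex r m y0 L t) := by
  intro c
  induction c with
  | zero =>
    intro k hk l hl y hinv t ht
    have hkL : k = L := by omega
    subst hkL
    exact hinv t ht
  | succ c ih =>
    intro k hk l hl y hinv t ht
    show mdeq md ((stagesB r md m ((2:Int) ^ L) c (l * 2) (stageB r md m ((2:Int) ^ L) l y)).getD t 0) _
    have hl2 : l * 2 = (2:Int) ^ (k + 1 + 1) := by rw [hl]; exact (pow_succ 2 (k+1)).symm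
    subst hl
    exact ih (k + 1) (by omega) _ hl2 _ (stage_sum L k (by omega) r md m hmd y0 y hinv) t ht

theorem tower_sum (L : Nat) (r : List Int) (md m : Int) (hmd : md ≠ 0) (y0 : List Int) :
    ∀ t, t < 2 ^ L →
      mdeq md ((stagesB r md m ((2:Int) ^ L) L 2 y0).getD t 0) (Sex r m y0 L t) := by
  intro t ht
  have hinv0 : ∀ t, t < 2 ^ L → mdeq md (y0.getD t 0) (Sex r m y0 0 t) := by
    intro t _
    unfold Sex Cex
    rw [pow_zero, Finset.sum_range_one, Finset.prod_range_zero, one_mul,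
        Nat.div_one, Nat.mul_one, Nat.add_zero]
    exact mdeq_refl md _
  exact stages_sum L r md m hmd y0 L 0 (by omega) 2 (by norm_num) y0 hinv0 t ht

-- ---- the exact sum over the gathered list, reindexed by bit reversal ----

theorem Sex_gather (r : List Int) (m : Int) (p : List Int) (L t : Nat) (ht : t < 2 ^ L) :
    Sex r m (gatherL p L) L t
      = ∑ j ∈ Finset.range (2 ^ L), Cex r m L t (revN L j) * (if j < p.length then p.getD j 0 else 0) := by
  unfold Sex
  have hbase : t / 2 ^ L = 0 := Nat.div_eq_of_lt ht
  simp only [hbase, Nat.zero_mul, Nat.zero_add]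
  have h1 : (∑ q ∈ Finset.range (2 ^ L), Cex r m L t q * (gatherL p L).getD q 0)
      = ∑ q ∈ Finset.range (2 ^ L), Cex r m L t q * (if revN L q < p.length then p.getD (revN L q) 0 else 0) :=
    Finset.sum_congr rfl (fun q hq => by
      rw [Finset.mem_range] at hq
      rw [gatherL_getD p L q hq])
  rw [h1]
  apply Finset.sum_nbij' (i := fun q => revN L q) (j := fun q => revN L q)
  · intro a ha; rw [Finset.mem_range] at *; exact revN_lt L a
  · intro a ha; rw [Finset.mem_range] at *; exact revN_lt L a
  · intro a ha; rw [Finset.mem_range] at ha; exact revN_revN L a ha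
  · intro a ha; rw [Finset.mem_range] at ha; exact revN_revN L a ha
  · intro q hq
    rw [Finset.mem_range] at hq
    rw [revN_revN L q hq]

-- ---- the coefficient computed by B is congruent to the exact coefficient ----

theorem coefB_cong (r : List Int) (m md : Int) (hmd : md ≠ 0) (L t j : Nat) (hj : j < 2 ^ L) :
    mdeq md (coefB (t : Int) (j : Int) r m (L : Int) md) (Cex r m L t (revN L j)) := by
  unfold coefB Cex
  have hlist : PySem.List.pyRange 0 (L : Int) 1 = (List.range L).map (fun k : Nat => (k : Int)) := by
    rw [PySem.List.pyRange_one]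
    simp
  rw [hlist, List.foldl_map]
  simp only [Int.toNat_natCast]
  suffices h : ∀ K, K ≤ L →
      mdeq md ((List.range K).foldl (fun (c : Int) (k : Nat) =>
        if PySem.Int.mod (PySem.Int.floordiv (j : Int) ((2:Int) ^ (((L : Int)) - 1 - ((k : Nat) : Int)).toNat)) 2 = 1 then
          let c' := PySem.Int.mod (c * PySem.List.pyGetD r
            (PySem.Int.floordiv (PySem.Int.mod (t : Int) ((2:Int) ^ (k : Nat)) * m) ((2:Int) ^ ((k : Nat) + 1))) 0) md
          if PySem.Int.mod (PySem.Int.floordiv (t : Int) ((2:Int) ^ (k : Nat))) 2 = 1 then PySem.Int.mod (-c') md else c'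
        else c) 1)
      (∏ i ∈ Finset.range K, facE r m i t (revN L j)) by
    exact h L le_rfl
  intro K
  induction K with
  | zero =>
    intro _
    rw [List.range_zero, List.foldl_nil, Finset.prod_range_zero]
    exact mdeq_refl md 1
  | succ K ih =>
    intro hKL
    rw [List.range_succ, List.foldl_append, List.foldl_cons, List.foldl_nil, Finset.prod_range_succ]
    have hc := ih (by omega)
    set c := (List.range K).foldl (fun (c : Int) (k : Nat) =>
        if PySem.Int.mod (PySem.Int.floordiv (j : Int) ((2:Int) ^ (((L : Int)) - 1 - ((k : Nat) : Int)).toNat)) 2 = 1 then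
          let c' := PySem.Int.mod (c * PySem.List.pyGetD r
            (PySem.Int.floordiv (PySem.Int.mod (t : Int) ((2:Int) ^ (k : Nat)) * m) ((2:Int) ^ ((k : Nat) + 1))) 0) md
          if PySem.Int.mod (PySem.Int.floordiv (t : Int) ((2:Int) ^ (k : Nat))) 2 = 1 then PySem.Int.mod (-c') md else c'
        else c) 1 with hcdef
    have heK : (((L : Int)) - 1 - (K : Int)).toNat = L - 1 - K := by omega
    rw [heK]
    have hg1 : PySem.Int.floordiv (j : Int) ((2:Int) ^ (L - 1 - K)) = ((j / 2 ^ (L - 1 - K) : Nat) : Int) := by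
      rw [← natCast_two_pow]
      exact_mod_cast PySem.Int.floordiv_natCast j (2 ^ (L - 1 - K))
    have hg2 : PySem.Int.floordiv (t : Int) ((2:Int) ^ K) = ((t / 2 ^ K : Nat) : Int) := by
      rw [← natCast_two_pow]
      exact_mod_cast PySem.Int.floordiv_natCast t (2 ^ K)
    have hmod2 : ∀ a : Nat, PySem.Int.mod ((a : Nat) : Int) 2 = ((a % 2 : Nat) : Int) := by
      intro a
      exact_mod_cast PySem.Int.mod_natCast a 2
    have hmodT : PySem.Int.mod (t : Int) ((2:Int) ^ K) = ((t % 2 ^ K : Nat) : Int) := by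
      rw [← natCast_two_pow]
      exact_mod_cast PySem.Int.mod_natCast t (2 ^ K)
    have hrevbit : revN L j / 2 ^ K % 2 = j / 2 ^ (L - 1 - K) % 2 := revN_bit L j K (by omega)
    have hW : PySem.List.pyGetD r
        (PySem.Int.floordiv (PySem.Int.mod (t : Int) ((2:Int) ^ K) * m) ((2:Int) ^ (K + 1))) 0 = wgt r m K t := by
      rw [hmodT]
      rfl
    rw [hg1, hg2, hmod2, hmod2, hW]
    by_cases hjb : j / 2 ^ (L - 1 - K) % 2 = 1
    · have hcond : (((j / 2 ^ (L - 1 - K) % 2 : Nat) : Int) = 1) := by exact_mod_cast hjb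
      rw [if_pos hcond]
      have hfac : facE r m K t (revN L j) =
          if t / 2 ^ K % 2 = 1 then -(wgt r m K t) else wgt r m K t := by
        unfold facE
        rw [hrevbit, if_pos hjb]
      by_cases htb : t / 2 ^ K % 2 = 1
      · have hcond2 : (((t / 2 ^ K % 2 : Nat) : Int) = 1) := by exact_mod_cast htb
        rw [if_pos hcond2, hfac, if_pos htb]
        show mdeq md (PySem.Int.mod (-(PySem.Int.mod (c * wgt r m K t) md)) md) _
        apply mdeq_trans (mdeq_mod_left hmd)
        apply mdeq_trans (mdeq_neg hmd (mdeq_mod_left hmd))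
        have : mdeq md (-(c * wgt r m K t)) ((∏ i ∈ Finset.range K, facE r m i t (revN L j)) * -(wgt r m K t)) := by
          have h1 := mdeq_neg hmd (mdeq_mul hmd hc (mdeq_refl md (wgt r m K t)))
          rw [show (∏ i ∈ Finset.range K, facE r m i t (revN L j)) * -(wgt r m K t)
              = -((∏ i ∈ Finset.range K, facE r m i t (revN L j)) * wgt r m K t) by ring]
          exact h1
        exact this
      · have hcond2 : ¬ (((t / 2 ^ K % 2 : Nat) : Int) = 1) := by
          intro hcc
          exact htb (by exact_mod_cast hcc)
        rw [if_neg hcond2, hfac, if_neg htb]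
        show mdeq md (PySem.Int.mod (c * wgt r m K t) md) _
        apply mdeq_trans (mdeq_mod_left hmd)
        exact mdeq_mul hmd hc (mdeq_refl md _)
    · have hcond : ¬ (((j / 2 ^ (L - 1 - K) % 2 : Nat) : Int) = 1) := by
        intro hcc
        exact hjb (by exact_mod_cast hcc)
      rw [if_neg hcond]
      have hfac : facE r m K t (revN L j) = 1 := by
        unfold facE
        rw [hrevbit, if_neg hjb]
      rw [hfac, mul_one]
      exact hc

-- ---- B's transform, entrywise ----

theorem foldl_add_range (f : ℕ → Int) : ∀ n,
    (List.range n).foldl (fun s k => s + f k) 0 = ∑ i ∈ Finset.range n, f i := by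
  intro n
  induction n with
  | zero => simp
  | succ n ih =>
    rw [List.range_succ, List.foldl_append, List.foldl_cons, List.foldl_nil,
        Finset.sum_range_succ, ih]

theorem transformB_entry (p r : List Int) (m md : Int) (L t : Nat) (ht : t < 2 ^ L) :
    (transformB p r ((2:Int) ^ L) (L : Int) m md).getD t 0 =
      PySem.Int.mod (∑ j ∈ Finset.range (min p.length (2 ^ L)),
        p.getD j 0 * coefB (t : Int) (j : Int) r m (L : Int) md) md := by
  unfold transformB
  rw [getD_map_pyRange0 _ _ t (by rw [← natCast_two_pow]; exact_mod_cast ht)]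
  congr 1
  have hmin : (min ((p.length : Int)) ((2:Int) ^ L)) = ((min p.length (2 ^ L) : Nat) : Int) := by
    rw [← natCast_two_pow]
    push_cast
    rfl
  have hlist : PySem.List.pyRange 0 (min ((p.length : Int)) ((2:Int) ^ L)) 1
      = (List.range (min p.length (2 ^ L))).map (fun k : Nat => (k : Int)) := by
    rw [hmin, PySem.List.pyRange_one, sub_zero, Int.toNat_natCast]
    simp only [zero_add]
  rw [hlist, List.foldl_map]
  simp only [Int.toNat_natCast]
  exact foldl_add_range (fun j => p.getD j 0 * coefB (t : Int) (j : Int) r m (L : Int) md)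
    (min p.length (2 ^ L))

theorem transformB_length (p r : List Int) (n logn m md : Int) :
    (transformB p r n logn m md).length = (n - 0).toNat := by
  unfold transformB
  rw [List.length_map, PySem.List.length_pyRange_one]

theorem transformB_cong (p r : List Int) (m md : Int) (hmd : md ≠ 0) (L t : Nat) (ht : t < 2 ^ L) :
    mdeq md ((transformB p r ((2:Int) ^ L) (L : Int) m md).getD t 0)
      (∑ j ∈ Finset.range (2 ^ L), Cex r m L t (revN L j) * (if j < p.length then p.getD j 0 else 0)) := by
  rw [transformB_entry p r m md L t ht]
  apply mdeq_trans (mdeq_mod_left hmd)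
  have hmin : min p.length (2 ^ L) ≤ 2 ^ L := min_le_right _ _
  have hstep2 : ∑ j ∈ Finset.range (2 ^ L), Cex r m L t (revN L j) * (if j < p.length then p.getD j 0 else 0)
      = ∑ j ∈ Finset.range (min p.length (2 ^ L)), Cex r m L t (revN L j) * (if j < p.length then p.getD j 0 else 0) := by
    symm
    apply Finset.sum_subset (Finset.range_subset_range.mpr hmin)
    intro x hx hnx
    rw [Finset.mem_range] at hx
    rw [Finset.mem_range, not_lt] at hnx
    have hxp : ¬ (x < p.length) := by omega
    rw [if_neg hxp, mul_zero]
  rw [hstep2]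
  apply mdeq_sum hmd
  intro i hi
  rw [Finset.mem_range] at hi
  have hip : i < p.length := by omega
  have hi2 : i < 2 ^ L := by omega
  rw [if_pos hip]
  apply mdeq_trans (mdeq_mul hmd (mdeq_refl md _) (coefB_cong r m md hmd L t i hi2))
  rw [mul_comm]
  exact mdeq_refl md _

-- ---- A's transform core, congruent to the same sum ----

theorem nttA_cong (L : Nat) (p r : List Int) (md m : Int) (hmd : md ≠ 0) :
    ∀ t, t < 2 ^ L →
      mdeq md ((stagesA r md m ((2:Int) ^ L) L 2
        (swapLoopA ((2:Int) ^ L)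
          (p ++ List.replicate (((2:Int) ^ L) - (p.length : Int)).toNat 0,
           PySem.Int.floordiv ((2:Int) ^ L) 2)).1).getD t 0)
      (∑ j ∈ Finset.range (2 ^ L), Cex r m L t (revN L j) * (if j < p.length then p.getD j 0 else 0)) := by
  intro t ht
  have hcore := ntt_core_eq L p p r md m (fun q _ => rfl)
  unfold mdeq
  rw [hcore.2 t ht, ← Sex_gather r m p L t ht]
  exact tower_sum L r md m hmd (gatherL p L) t ht

theorem multiply3_main : ∀ (p1 : List Int) (p2 : List Int) (r : List Int) (mod : Int),
    Pre_multiply3 p1 p2 r mod → multiply3 p1 p2 r mod = multiply3_alt p1 p2 r mod := by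
  intro p1 p2 r md hpre
  obtain ⟨hmd, -⟩ := hpre
  simp only [multiply3, multiply3_alt]
  set n0 : Int := (p1.length : Int) + 2 * (p2.length : Int) - 3 with hn0
  set L := pvL0 n0 with hLdef
  rw [gpt_eq n0, ← hLdef]
  have hlogB : (if 0 < n0 then (PySem.Int.bitLength n0 : Int) else 0) = (L : Int) := by
    rw [hLdef]; unfold pvL0; split_ifs <;> simp
  rw [hlogB]
  have hnB : (1:Int) <<< ((L : Int)).toNat = (2:Int) ^ L := by
    rw [Int.toNat_natCast, one_shiftLeft_int]
  rw [hnB]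
  rw [power_eq hmd]
  set ninv := pwB ((2:Int) ^ L) (md - 2) md with hninv
  unfold NTTA
  simp only [Int.toNat_natCast]
  have hif1 : ((1:Int) = -1) = False := by simp
  simp only [hif1, if_true, if_false]
  simp only [pad_eq]
  rw [show (r.length : Int) * 1 = (r.length : Int) by ring,
      show (r.length : Int) * (-1) = -(r.length : Int) by ring]
  -- the two forward towers of A
  set y1A := stagesA r md (r.length : Int) ((2:Int) ^ L) L 2
      (swapLoopA ((2:Int) ^ L)
        (p1 ++ List.replicate (((2:Int) ^ L) - (p1.length : Int)).toNat 0,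
         PySem.Int.floordiv ((2:Int) ^ L) 2)).1 with hy1A
  set y2A := stagesA r md (r.length : Int) ((2:Int) ^ L) L 2
      (swapLoopA ((2:Int) ^ L)
        (p2 ++ List.replicate (((2:Int) ^ L) - (p2.length : Int)).toNat 0,
         PySem.Int.floordiv ((2:Int) ^ L) 2)).1 with hy2A
  -- the two direct transforms of B
  set y1B := transformB p1 r ((2:Int) ^ L) (L : Int) (r.length : Int) md with hy1B
  set y2B := transformB p2 r ((2:Int) ^ L) (L : Int) (r.length : Int) md with hy2B
  have hy1Blen : y1B.length = 2 ^ L := by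
    rw [hy1B, transformB_length, toNat_two_pow_sub_zero]
  have hy2Blen : y2B.length = 2 ^ L := by
    rw [hy2B, transformB_length, toNat_two_pow_sub_zero]
  have hS1 : ∀ i, i < 2 ^ L → mdeq md (y1A.getD i 0) (y1B.getD i 0) := by
    intro i hi
    exact mdeq_trans (nttA_cong L p1 r md (r.length : Int) hmd i hi)
      (mdeq_symm (transformB_cong p1 r (r.length : Int) md hmd L i hi))
  have hS2 : ∀ i, i < 2 ^ L → mdeq md (y2A.getD i 0) (y2B.getD i 0) := by
    intro i hi
    exact mdeq_trans (nttA_cong L p2 r md (r.length : Int) hmd i hi)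
      (mdeq_symm (transformB_cong p2 r (r.length : Int) md hmd L i hi))
  -- the pointwise products are EQUAL lists
  set y3A := (PySem.List.pyRange 0 ((2:Int) ^ L) 1).map (fun i =>
      PySem.Int.mod (PySem.Int.mod (1 * (y2A.getD i.toNat 0 * y2A.getD i.toNat 0)) md * y1A.getD i.toNat 0) md) with hy3A
  set y3B := (y1B.zip y2B).map (fun ab => PySem.Int.mod (PySem.Int.mod (ab.2 * ab.2) md * ab.1) md) with hy3B
  have hy3Alen : y3A.length = 2 ^ L := by
    rw [hy3A, List.length_map, PySem.List.length_pyRange_one, toNat_two_pow_sub_zero]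
  have hy3Blen : y3B.length = 2 ^ L := by
    rw [hy3B, List.length_map, List.length_zip]
    omega
  have hy3 : y3A = y3B := by
    apply List.ext_getElem (by omega)
    intro i h1 h2
    have hi : i < 2 ^ L := by omega
    rw [← List.getD_eq_getElem _ 0 h1, ← List.getD_eq_getElem _ 0 h2]
    rw [hy3A, getD_map_pyRange0 _ _ i (by rw [← natCast_two_pow L]; exact_mod_cast hi),
        hy3B, getD_zip_map _ _ _ i (by omega) (by omega)]
    simp only [Int.toNat_natCast]
    show PySem.Int.mod (PySem.Int.mod (1 * (y2A.getD i 0 * y2A.getD i 0)) md * y1A.getD i 0) md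
        = PySem.Int.mod (PySem.Int.mod (y2B.getD i 0 * y2B.getD i 0) md * y1B.getD i 0) md
    have hXY : mdeq md (PySem.Int.mod (1 * (y2A.getD i 0 * y2A.getD i 0)) md * y1A.getD i 0)
        (PySem.Int.mod (y2B.getD i 0 * y2B.getD i 0) md * y1B.getD i 0) := by
      apply mdeq_trans (mdeq_mul hmd (mdeq_mod_left hmd) (mdeq_refl md _))
      apply mdeq_trans (b := (1 * (y2B.getD i 0 * y2B.getD i 0)) * y1B.getD i 0)
      · exact mdeq_mul hmd (mdeq_mul hmd (mdeq_refl md 1) (mdeq_mul hmd (hS2 i hi) (hS2 i hi))) (hS1 i hi)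
      · rw [one_mul]
        exact mdeq_symm (mdeq_mul hmd (mdeq_mod_left hmd) (mdeq_refl md _))
    exact hXY
  -- the inverse transforms
  have hTz : ∀ i, i < 2 ^ L →
      mdeq md ((stagesA r md (-(r.length : Int)) ((2:Int) ^ L) L 2
        (swapLoopA ((2:Int) ^ L)
          (y3A ++ List.replicate (((2:Int) ^ L) - (y3A.length : Int)).toNat 0,
           PySem.Int.floordiv ((2:Int) ^ L) 2)).1).getD i 0)
      ((transformB y3B r ((2:Int) ^ L) (L : Int) (-(r.length : Int)) md).getD i 0) := by
    intro i hi
    rw [hy3]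
    exact mdeq_trans (nttA_cong L y3B r md (-(r.length : Int)) hmd i hi)
      (mdeq_symm (transformB_cong y3B r (-(r.length : Int)) md hmd L i hi))
  set z := transformB y3B r ((2:Int) ^ L) (L : Int) (-(r.length : Int)) md with hz
  have hzlen : z.length = 2 ^ L := by
    rw [hz, transformB_length, toNat_two_pow_sub_zero]
  apply List.ext_getElem
  · rw [List.length_map, PySem.List.length_pyRange_one, List.length_map, hzlen,
        toNat_two_pow_sub_zero]
  · intro i h1 h2
    have hi : i < 2 ^ L := by
      rw [List.length_map, hzlen] at h2
      exact h2
    rw [← List.getD_eq_getElem _ 0 h1, ← List.getD_eq_getElem _ 0 h2]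
    rw [getD_map_pyRange0 _ _ i (by rw [← natCast_two_pow L]; exact_mod_cast hi),
        getD_map_lt _ _ i (by rw [hzlen]; exact hi)]
    simp only [Int.toNat_natCast]
    exact mdeq_mul hmd (hTz i hi) (mdeq_refl md ninv)

-- ===== VERDICT (by name: the statement is the Claim_ definition above) =====
theorem multiply3_spec : Claim_equal_multiply3 := by
  intro p1 p2 r mod _ hpre
  exact multiply3_main p1 p2 r mod hpre
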